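-- pv_equiv track=rewrite | github.com/dainshon/CODING | 프로그래머스/unrated/169199. 리코쳇 로봇/리코쳇 로봇.py | solution
-- ===== SOURCE A (Python) =====
-- from collections import deque
--
-- def solution(board):
--     answer = 0
--     map = []
--     R = []
--     G = []
--
--     for b in board:
--         lst = list(b)
--         map.append(lst)
--
--     for i in range(len(map)):
--         flag=0
--         for j in range(len(map[0])):
--             if(map[i][j]=='R'):
--                 R.append(i)
--                 R.append(j)
--             elif(map[i][j]=='G'):
--                 G.append(i)
--                 G.append(j)
--
--             if(len(R)!=0 and len(G)!=0):
--                 flag=1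
--                 break
--         if(flag==1):
--             break
--
--     dx = [-1, 1, 0, 0]    # 상하
--     dy = [0, 0, -1, 1]    # 좌우
--     x = R[0]
--     y = R[1]
--
--     def dfs():
--         dq = deque()
--         visited = [[0]*len(map[0]) for i in range(len(map))]
--         visited[x][y] = 1
--         dq.append(x)
--         dq.append(y)
--
--         while(dq):
--             cx = dq.popleft()
--             cy = dq.popleft()
--             if(map[cx][cy]=='G'):
--                 return visited[cx][cy]
--
--             for i in range(4):
--                 fx = cx
--                 fy = cy
--
--                 while(1):
--                     fx, fy = fx+dx[i], fy+dy[i]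
--                     if(0<=fx<len(map) and 0<=fy<len(map[0]) and map[fx][fy]=='D'):    #  D 만남
--                         fx -= dx[i]
--                         fy -= dy[i]
--                         break
--
--                     if(fx<0 or fx>=len(map) or fy<0 or fy>=len(map[0])):        #  벗어남
--                         fx -= dx[i]
--                         fy -= dy[i]
--                         break
--                 if(visited[fx][fy]==0):
--                     visited[fx][fy] = visited[cx][cy]+1
--                     dq.append(fx)
--                     dq.append(fy)
--
--         return -1
--
--     answer = dfs()
--     if(answer>0):
--         answer-=1
--
--
--     return answer
-- ===== SOURCE B (Python) =====
-- def solution(board):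
--     g = [list(r) for r in board]
--     n, m = len(g), len(g[0])
--
--     def stop(i, j, di, dj):
--         while 0 <= i + di < n and 0 <= j + dj < m and g[i + di][j + dj] != 'D':
--             i, j = i + di, j + dj
--         return (i, j)
--
--     start = next((i, j) for i in range(n) for j in range(m) if g[i][j] == 'R')
--     dirs = [(-1, 0), (1, 0), (0, -1), (0, 1)]
--
--     # Bellman-Ford style dynamic programming: dist[c] = length of a shortest
--     # slide sequence from start to c, computed by n*m rounds of relaxation.
--     dist = {start: 0}
--     for _ in range(n * m):
--         new = dict(dist)
--         for u, du in dist.items():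
--             for di, dj in dirs:
--                 v = stop(u[0], u[1], di, dj)
--                 if v not in new or new[v] > du + 1:
--                     new[v] = du + 1
--         dist = new
--     return min((dist[c] for c in dist if g[c[0]][c[1]] == 'G'), default=-1)
-- ===== Notes on version B (the rewrite author's own statement) =====
-- stated objective: alternative
-- what changed: B replaces A's queue-based BFS (flat integer deque, 0/1-offset visited matrix, per-pop sliding while-loops) with a Bellman-Ford style dynamic program: a distance dict seeded with the start cell is relaxed for n*m rounds, each round recomputing slide-stop successors of every known cell from the previous round's table, and the answer is the minimum distance over goal cells (default -1).
-- outside the precondition, e.g. on solution(['RG', 'G']): A returns 1, B raises IndexError; on solution(['DRD', 'GDG', 'GD']): A returns -1, B returns -1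
import Mathlib
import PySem

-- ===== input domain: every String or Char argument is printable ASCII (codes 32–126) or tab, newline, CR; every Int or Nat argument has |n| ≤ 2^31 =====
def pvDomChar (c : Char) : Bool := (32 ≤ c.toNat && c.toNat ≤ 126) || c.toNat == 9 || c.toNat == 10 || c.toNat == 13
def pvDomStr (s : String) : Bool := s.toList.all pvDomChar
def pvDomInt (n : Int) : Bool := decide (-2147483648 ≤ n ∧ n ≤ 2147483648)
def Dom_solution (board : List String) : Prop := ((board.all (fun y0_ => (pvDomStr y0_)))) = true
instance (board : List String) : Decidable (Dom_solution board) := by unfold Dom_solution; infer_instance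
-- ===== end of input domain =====

-- B replaces A's queue BFS by a Bellman-Ford style dynamic program (n*m rounds of relaxation
-- over a distance dict, then a minimum over goal cells); alternative structure, not claimed faster.

-- ===== PORT A =====
-- map[i][j]; total form of Python's indexing, only used in range under Pre_
def aAt (mp : List (List Char)) (i j : Int) : Char :=
  PySem.List.pyGetD (PySem.List.pyGetD mp i []) j ' '

-- the inner j-loop of A's R/G scan (append to R / elif append to G / break when both nonempty)
def aScanRow (mp : List (List Char)) (i : Int) :
    List Int → List Int → List Int → (List Int × List Int × Bool)
  | [], R, G => (R, G, false)
  | j :: js, R, G =>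
    let RG := if aAt mp i j = 'R' then (R ++ [i, j], G)
              else if aAt mp i j = 'G' then (R, G ++ [i, j]) else (R, G)
    if RG.1 ≠ [] ∧ RG.2 ≠ [] then (RG.1, RG.2, true) else aScanRow mp i js RG.1 RG.2

-- the outer i-loop with the flag-controlled break
def aScan (mp : List (List Char)) : List Int → List Int → List Int → (List Int × List Int)
  | [], R, G => (R, G)
  | i :: is, R, G =>
    let t := aScanRow mp i (PySem.List.pyRange 0 ((PySem.List.pyGetD mp 0 []).length : Int) 1) R G
    if t.2.2 then (t.1, t.2.1) else aScan mp is t.1 t.2.1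

-- the inner while(1) sliding loop; fuel n+m+2 always exceeds the number of in-board steps
def aSlide (mp : List (List Char)) (n m dx dy : Int) : Nat → Int → Int → Int × Int
  | 0, fx, fy => (fx, fy)
  | f + 1, fx, fy =>
    let fx' := fx + dx
    let fy' := fy + dy
    if 0 ≤ fx' ∧ fx' < n ∧ 0 ≤ fy' ∧ fy' < m ∧ aAt mp fx' fy' = 'D' then (fx' - dx, fy' - dy)
    else if fx' < 0 ∨ n ≤ fx' ∨ fy' < 0 ∨ m ≤ fy' then (fx' - dx, fy' - dy)
    else aSlide mp n m dx dy f fx' fy'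

def aGet2 (v : List (List Int)) (i j : Int) : Int :=
  PySem.List.pyGetD (PySem.List.pyGetD v i []) j 0

def aSet2 (v : List (List Int)) (i j x : Int) : List (List Int) :=
  PySem.List.pySetD v i (PySem.List.pySetD (PySem.List.pyGetD v i []) j x)

-- the while(dq) loop; each iteration pops cx,cy; fuel n*m+2 exceeds the number of pops
def aBfs (mp : List (List Char)) (n m : Int) : Nat → List Int → List (List Int) → Int
  | 0, _, _ => -1
  | _ + 1, [], _ => -1
  | _ + 1, [_], _ => -1
  | f + 1, cx :: cy :: rest, vis =>
    if aAt mp cx cy = 'G' then aGet2 vis cx cy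
    else
      let st := (PySem.List.pyRange 0 4 1).foldl (fun (st : List Int × List (List Int)) i =>
        let dx := PySem.List.pyGetD [-1, 1, 0, 0] i 0
        let dy := PySem.List.pyGetD [0, 0, -1, 1] i 0
        let p := aSlide mp n m dx dy (n.toNat + m.toNat + 2) cx cy
        if aGet2 st.2 p.1 p.2 = 0 then
          (st.1 ++ [p.1, p.2], aSet2 st.2 p.1 p.2 (aGet2 st.2 cx cy + 1))
        else st) (rest, vis)
      aBfs mp n m f st.1 st.2

def solution (board : List String) : Int :=
  let mp := board.map (fun b => b.toList)
  let RG := aScan mp (PySem.List.pyRange 0 (mp.length : Int) 1) [] []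
  let x := PySem.List.pyGetD RG.1 0 0
  let y := PySem.List.pyGetD RG.1 1 0
  let n : Int := (mp.length : Int)
  let m : Int := ((PySem.List.pyGetD mp 0 []).length : Int)
  let vis0 := (PySem.List.pyRange 0 n 1).map (fun _ => List.replicate m.toNat 0)
  let vis1 := aSet2 vis0 x y 1
  let answer := aBfs mp n m (n.toNat * m.toNat + 2) [x, y] vis1
  if answer > 0 then answer - 1 else answer

-- ===== PORT B =====
def bAt (g : List (List Char)) (i j : Int) : Char :=
  PySem.List.pyGetD (PySem.List.pyGetD g i []) j ' '

-- Source B's stop(): while in range and not a wall, keep sliding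
def bStop (g : List (List Char)) (n m di dj : Int) : Nat → Int → Int → Int × Int
  | 0, i, j => (i, j)
  | f + 1, i, j =>
    if 0 ≤ i + di ∧ i + di < n ∧ 0 ≤ j + dj ∧ j + dj < m ∧ bAt g (i + di) (j + dj) ≠ 'D'
    then bStop g n m di dj f (i + di) (j + dj)
    else (i, j)

def bDirs : List (Int × Int) := [(-1, 0), (1, 0), (0, -1), (0, 1)]

-- the generator (i, j) for i in range(n) for j in range(m)
def bCells (n m : Int) : List (Int × Int) :=
  (PySem.List.pyRange 0 n 1).flatMap (fun i => (PySem.List.pyRange 0 m 1).map (fun j => (i, j)))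

-- one round of the relaxation loop: new = dict(dist); for u, du in dist.items(): for each dir,
-- v = stop(u); if v not in new or new[v] > du + 1: new[v] = du + 1
def bRound (g : List (List Char)) (n m : Int) (dist : PySem.Dict (Int × Int) Int) :
    PySem.Dict (Int × Int) Int :=
  dist.items.foldl (fun new p =>
    bDirs.foldl (fun new d =>
      let v := bStop g n m d.1 d.2 (n.toNat + m.toNat + 2) p.1.1 p.1.2
      if new.contains v = false ∨ new.getD v 0 > p.2 + 1 then new.insert v (p.2 + 1) else new)
      new) dist

def solution_alt (board : List String) : Int :=
  let g := board.map (fun r => r.toList)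
  let n : Int := (g.length : Int)
  let m : Int := ((PySem.List.pyGetD g 0 []).length : Int)
  let start := ((bCells n m).find? (fun c => bAt g c.1 c.2 = 'R')).getD (0, 0)
  let dist := (PySem.List.pyRange 0 (n * m) 1).foldl
    (fun dist _ => bRound g n m dist) ((PySem.Dict.empty).insert start 0)
  (PySem.List.min? ((dist.items.filter (fun p => bAt g p.1.1 p.1.2 = 'G')).map (fun p => p.2))
    (fun x => x)).getD (-1)

-- ===== PRECONDITION & SPEC =====
-- Pre_ excludes the empty board and boards with no 'R' in the first len(board[0]) columns (A
-- raises IndexError there), and jagged boards with a row shorter than the first row: there A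
-- usually raises IndexError, and on the few such boards A still returns a value B's slide
-- computations over out-of-row cells raise IndexError or make the agreement accidental.
def Pre_solution (board : List String) : Prop :=
  board ≠ [] ∧
  (∀ r ∈ board, (board.headD "").toList.length ≤ r.toList.length) ∧
  board.any (fun r => (r.toList.take (board.headD "").toList.length).contains 'R')
instance (board : List String) : Decidable (Pre_solution board) := by
  unfold Pre_solution; infer_instance
def pvWitness_solution : List String := ["RG"]

def Spec_solution (board : List String) (out : Int) : Prop := out = solution_alt board
instance (board : List String) (out : Int) : Decidable (Spec_solution board out) := by
  unfold Spec_solution; infer_instance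

-- ===== CLAIM (what is proved, stated in full; the proofs are below) =====
def Claim_equal_solution : Prop :=
  ∀ (board : List String), Dom_solution board → Pre_solution board →
    Spec_solution board (solution board)


-- ===== LEMMAS AND PROOFS =====

theorem bAt_eq_aAt : bAt = aAt := rfl

def CellOK (mp : List (List Char)) (n m : Int) (c : Int × Int) : Prop :=
  0 ≤ c.1 ∧ c.1 < n ∧ 0 ≤ c.2 ∧ c.2 < m ∧ aAt mp c.1 c.2 ≠ 'D'

theorem slide_eq (mp : List (List Char)) (n m dx dy : Int) : ∀ (f : Nat) (fx fy : Int),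
    aSlide mp n m dx dy f fx fy = bStop mp n m dx dy f fx fy := by
  intro f
  induction f with
  | zero => intro fx fy; rfl
  | succ f ih =>
    intro fx fy
    simp only [aSlide, bStop, bAt_eq_aAt]
    by_cases hin : 0 ≤ fx + dx ∧ fx + dx < n ∧ 0 ≤ fy + dy ∧ fy + dy < m
    · by_cases hD : aAt mp (fx + dx) (fy + dy) = 'D'
      · rw [if_pos ⟨hin.1, hin.2.1, hin.2.2.1, hin.2.2.2, hD⟩, if_neg (by tauto)]
        simp only [Prod.mk.injEq]; omega
      · rw [if_neg (by tauto), if_neg (by omega), if_pos ⟨hin.1, hin.2.1, hin.2.2.1, hin.2.2.2, hD⟩]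
        exact ih _ _
    · rw [if_neg (by tauto), if_pos (by omega), if_neg (by tauto)]
      simp only [Prod.mk.injEq]; omega

theorem stop_ok (mp : List (List Char)) (n m dx dy : Int) : ∀ (f : Nat) (fx fy : Int),
    CellOK mp n m (fx, fy) → CellOK mp n m (bStop mp n m dx dy f fx fy) := by
  intro f
  induction f with
  | zero => intro fx fy h; exact h
  | succ f ih =>
    intro fx fy h
    simp only [bStop, bAt_eq_aAt]
    by_cases hc : 0 ≤ fx + dx ∧ fx + dx < n ∧ 0 ≤ fy + dy ∧ fy + dy < m ∧ aAt mp (fx + dx) (fy + dy) ≠ 'D'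
    · rw [if_pos hc]
      exact ih _ _ ⟨hc.1, hc.2.1, hc.2.2.1, hc.2.2.2.1, hc.2.2.2.2⟩
    · rw [if_neg hc]; exact h

theorem mem_bCells (n m : Int) (c : Int × Int) :
    c ∈ bCells n m ↔ 0 ≤ c.1 ∧ c.1 < n ∧ 0 ≤ c.2 ∧ c.2 < m := by
  obtain ⟨i, j⟩ := c
  simp only [bCells, List.mem_flatMap, List.mem_map, PySem.List.mem_pyRange_one, Prod.mk.injEq]
  constructor
  · rintro ⟨a, ha, b, hb, rfl, rfl⟩; exact ⟨ha.1, ha.2, hb.1, hb.2⟩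
  · rintro ⟨h1, h2, h3, h4⟩; exact ⟨i, ⟨h1, h2⟩, j, ⟨h3, h4⟩, rfl, rfl⟩

theorem nodup_pairs (l t2 : List Int) (h : l.Nodup) (h2 : t2.Nodup) :
    (l.flatMap (fun i => t2.map (fun j => (i, j)))).Nodup := by
  induction l with
  | nil => simp
  | cons a t ih =>
    simp only [List.flatMap_cons, List.nodup_append]
    refine ⟨h2.map (by intro x y hxy; simpa using hxy), ih (List.nodup_cons.mp h).2, ?_⟩
    intro x hx y hy
    simp only [List.mem_map] at hx
    simp only [List.mem_flatMap, List.mem_map] at hy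
    obtain ⟨j, _, rfl⟩ := hx
    obtain ⟨i, hi, j', _, rfl⟩ := hy
    intro hc
    cases hc
    exact (List.nodup_cons.mp h).1 hi

theorem nodup_bCells (n m : Int) : (bCells n m).Nodup :=
  nodup_pairs _ _ (PySem.List.nodup_pyRange_one 0 n) (PySem.List.nodup_pyRange_one 0 m)

def Shape (N M : Nat) (vis : List (List Int)) : Prop :=
  vis.length = N ∧ ∀ row ∈ vis, row.length = M

theorem shape_set (N M : Nat) (vis : List (List Int)) (i j x : Int)
    (hs : Shape N M vis)
    (hi : 0 ≤ i) (hi2 : i < (N : Int)) (hj : 0 ≤ j) :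
    Shape N M (aSet2 vis i j x) := by
  obtain ⟨h1, h2⟩ := hs
  unfold aSet2
  rw [PySem.List.pyGetD_eq_getElem vis [] hi (by omega),
      PySem.List.pySetD_of_nonneg (vis[i.toNat]'(by omega)) x hj,
      PySem.List.pySetD_of_nonneg vis _ hi]
  constructor
  · simp [h1]
  · intro row hrow
    rcases List.mem_or_eq_of_mem_set hrow with h | h
    · exact h2 _ h
    · subst h
      rw [List.length_set]
      exact h2 _ (List.getElem_mem _)

theorem get2_set2 (N M : Nat) (vis : List (List Int)) (i j i' j' x : Int)
    (hs : Shape N M vis)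
    (hi : 0 ≤ i) (hi2 : i < (N : Int)) (hj : 0 ≤ j) (hj2 : j < (M : Int))
    (hi' : 0 ≤ i') (hi2' : i' < (N : Int)) (hj' : 0 ≤ j') (hj2' : j' < (M : Int)) :
    aGet2 (aSet2 vis i j x) i' j' = if i' = i ∧ j' = j then x else aGet2 vis i' j' := by
  obtain ⟨h1, h2⟩ := hs
  have hrow : PySem.List.pyGetD vis i [] = vis[i.toNat]'(by omega) :=
    PySem.List.pyGetD_eq_getElem vis [] hi (by omega)
  have hrlen : (vis[i.toNat]'(by omega)).length = M := h2 _ (by apply List.getElem_mem)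
  have hset : aSet2 vis i j x = vis.set i.toNat ((vis[i.toNat]'(by omega)).set j.toNat x) := by
    unfold aSet2
    rw [hrow, PySem.List.pySetD_of_nonneg (vis[i.toNat]'(by omega)) x hj, PySem.List.pySetD_of_nonneg vis _ hi]
  rw [hset]
  unfold aGet2
  have hlen2 : i' < ((vis.set i.toNat ((vis[i.toNat]'(by omega)).set j.toNat x)).length : Int) := by
    simp; omega
  rw [PySem.List.pyGetD_eq_getElem _ [] hi' hlen2]
  rw [List.getElem_set]
  by_cases hii : i' = i
  · subst hii
    rw [if_pos (by omega)]
    rw [PySem.List.pyGetD_eq_getElem _ 0 hj' (by rw [List.length_set]; omega)]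
    rw [List.getElem_set]
    by_cases hjj : j' = j
    · subst hjj; rw [if_pos (by omega), if_pos ⟨rfl, rfl⟩]
    · rw [if_neg (by omega), if_neg (by tauto)]
      rw [PySem.List.pyGetD_eq_getElem vis [] hi' (by omega), PySem.List.pyGetD_eq_getElem _ 0 hj' (by rw [hrlen]; omega)]
  · rw [if_neg (by omega), if_neg (by tauto)]
    rw [PySem.List.pyGetD_eq_getElem vis [] hi' (by omega)]

-- the slide-stop successors of a cell, one per direction (shared by both ports' analyses)
def nb (mp : List (List Char)) (n m : Int) (c : Int × Int) : List (Int × Int) :=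
  bDirs.map (fun d => bStop mp n m d.1 d.2 (n.toNat + m.toNat + 2) c.1 c.2)

theorem nb_ok (mp : List (List Char)) (n m : Int) (c : Int × Int) (hc : CellOK mp n m c) :
    ∀ v ∈ nb mp n m c, CellOK mp n m v := by
  intro v hv
  simp only [nb, bDirs, List.map_cons, List.map_nil, List.mem_cons, List.not_mem_nil, or_false] at hv
  obtain ⟨c1, c2⟩ := c
  rcases hv with rfl | rfl | rfl | rfl <;> exact stop_ok mp n m _ _ _ c1 c2 hc

-- A's expansion of one popped cell, on (pending, visited) pair state
def exp1 (mp : List (List Char)) (n m : Int)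
    (st : List (Int × Int) × List (List Int)) (c : Int × Int) :
    List (Int × Int) × List (List Int) :=
  (nb mp n m c).foldl (fun st p =>
    if aGet2 st.2 p.1 p.2 = 0 then
      (st.1 ++ [p], aSet2 st.2 p.1 p.2 (aGet2 st.2 c.1 c.2 + 1))
    else st) st

-- A's BFS loop re-read level-synchronously: F = rest of current level, P = next level so far
def lvlrun (mp : List (List Char)) (n m : Int) :
    Nat → List (Int × Int) → List (Int × Int) → List (List Int) → Int
  | 0, _, _, _ => -1
  | _ + 1, [], [], _ => -1
  | f + 1, [], p :: P, vis => lvlrun mp n m (f + 1) (p :: P) [] vis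
  | f + 1, c :: F, P, vis =>
    if aAt mp c.1 c.2 = 'G' then aGet2 vis c.1 c.2
    else lvlrun mp n m f F (exp1 mp n m (P, vis) c).1 (exp1 mp n m (P, vis) c).2
  termination_by f _ P _ => (f, P.length)

-- the frontier/visited sequence of the BFS, level by level
def levels (mp : List (List Char)) (n m : Int) (F0 : List (Int × Int)) (vis0 : List (List Int)) :
    Nat → List (Int × Int) × List (List Int)
  | 0 => (F0, vis0)
  | j + 1 =>
    (levels mp n m F0 vis0 j).1.foldl (exp1 mp n m) ([], (levels mp n m F0 vis0 j).2)

-- B's relaxation rounds as an iterate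
def distIter (g : List (List Char)) (n m : Int) (d0 : PySem.Dict (Int × Int) Int) :
    Nat → PySem.Dict (Int × Int) Int
  | 0 => d0
  | j + 1 => bRound g n m (distIter g n m d0 j)

def flatQ (dq : List (Int × Int)) : List Int := dq.flatMap (fun c => [c.1, c.2])

-- bounded search for the first level whose frontier contains a goal cell
def seekG (pred : Nat → Bool) : Nat → Nat → Option Nat
  | 0, _ => none
  | f + 1, j => if pred j then some j else seekG pred f (j + 1)

-- A's inner direction loop is the fold of the flat step over the successor list
theorem afold_eq (mp : List (List Char)) (n m cx cy : Int) (init : List Int × List (List Int)) :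
    (PySem.List.pyRange 0 4 1).foldl (fun (st : List Int × List (List Int)) i =>
        let dx := PySem.List.pyGetD [-1, 1, 0, 0] i 0
        let dy := PySem.List.pyGetD [0, 0, -1, 1] i 0
        let p := aSlide mp n m dx dy (n.toNat + m.toNat + 2) cx cy
        if aGet2 st.2 p.1 p.2 = 0 then
          (st.1 ++ [p.1, p.2], aSet2 st.2 p.1 p.2 (aGet2 st.2 cx cy + 1))
        else st) init
      = (nb mp n m (cx, cy)).foldl (fun (st : List Int × List (List Int)) p =>
          if aGet2 st.2 p.1 p.2 = 0 then
            (st.1 ++ [p.1, p.2], aSet2 st.2 p.1 p.2 (aGet2 st.2 cx cy + 1))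
          else st) init := by
  have h4 : PySem.List.pyRange 0 4 1 = [0, 1, 2, 3] := by decide
  have e0 : PySem.List.pyGetD [(-1 : Int), 1, 0, 0] (0 : Int) 0 = -1 := by decide
  have e1 : PySem.List.pyGetD [(-1 : Int), 1, 0, 0] (1 : Int) 0 = 1 := by decide
  have e2 : PySem.List.pyGetD [(-1 : Int), 1, 0, 0] (2 : Int) 0 = 0 := by decide
  have e3 : PySem.List.pyGetD [(-1 : Int), 1, 0, 0] (3 : Int) 0 = 0 := by decide
  have f0 : PySem.List.pyGetD [(0 : Int), 0, -1, 1] (0 : Int) 0 = 0 := by decide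
  have f1 : PySem.List.pyGetD [(0 : Int), 0, -1, 1] (1 : Int) 0 = 0 := by decide
  have f2 : PySem.List.pyGetD [(0 : Int), 0, -1, 1] (2 : Int) 0 = -1 := by decide
  have f3 : PySem.List.pyGetD [(0 : Int), 0, -1, 1] (3 : Int) 0 = 1 := by decide
  simp only [h4, List.foldl_cons, List.foldl_nil, e0, e1, e2, e3, f0, f1, f2, f3,
    slide_eq, nb, bDirs, List.map_cons, List.map_nil]

-- the flat-state fold is the pair-state fold with the queue prefix carried along
theorem fold_flat (mp : List (List Char)) (n m cx cy : Int) :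
    ∀ (ns : List (Int × Int)) (base : List Int) (P : List (Int × Int)) (vis : List (List Int)),
      ns.foldl (fun (st : List Int × List (List Int)) p =>
          if aGet2 st.2 p.1 p.2 = 0 then
            (st.1 ++ [p.1, p.2], aSet2 st.2 p.1 p.2 (aGet2 st.2 cx cy + 1))
          else st) (base ++ flatQ P, vis)
        = (base ++ flatQ (ns.foldl (fun (st : List (Int × Int) × List (List Int)) p =>
              if aGet2 st.2 p.1 p.2 = 0 then
                (st.1 ++ [p], aSet2 st.2 p.1 p.2 (aGet2 st.2 cx cy + 1))
              else st) (P, vis)).1,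
           (ns.foldl (fun (st : List (Int × Int) × List (List Int)) p =>
              if aGet2 st.2 p.1 p.2 = 0 then
                (st.1 ++ [p], aSet2 st.2 p.1 p.2 (aGet2 st.2 cx cy + 1))
              else st) (P, vis)).2) := by
  intro ns
  induction ns with
  | nil => intro base P vis; rfl
  | cons p ns ih =>
    intro base P vis
    simp only [List.foldl_cons]
    by_cases h : aGet2 vis p.1 p.2 = 0
    · rw [if_pos h, if_pos h]
      have hflat : (base ++ flatQ P) ++ [p.1, p.2] = base ++ flatQ (P ++ [p]) := by
        simp [flatQ]
      rw [hflat]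
      exact ih base (P ++ [p]) _
    · rw [if_neg h, if_neg h]
      exact ih base P vis

-- A's queue loop, with the queue split as current level ++ next level, is lvlrun
theorem abfs_eq_lvlrun (mp : List (List Char)) (n m : Int) :
    ∀ (f : Nat) (F P : List (Int × Int)) (vis : List (List Int)),
      aBfs mp n m f (flatQ F ++ flatQ P) vis = lvlrun mp n m f F P vis := by
  intro f
  induction f with
  | zero => intro F P vis; simp [aBfs, lvlrun]
  | succ f ih =>
    intro F P vis
    have hcons : ∀ (c : Int × Int) (F' P' : List (Int × Int)) (vis' : List (List Int)),
        aBfs mp n m (f + 1) (flatQ (c :: F') ++ flatQ P') vis' = lvlrun mp n m (f + 1) (c :: F') P' vis' := by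
      intro c F' P' vis'
      have hflat : flatQ (c :: F') ++ flatQ P' = c.1 :: c.2 :: (flatQ F' ++ flatQ P') := by
        simp [flatQ]
      rw [hflat]
      by_cases hG : aAt mp c.1 c.2 = 'G'
      · simp only [aBfs, lvlrun, if_pos hG]
      · simp only [aBfs, lvlrun, if_neg hG]
        rw [afold_eq mp n m c.1 c.2, fold_flat mp n m c.1 c.2 _ (flatQ F') P' vis']
        exact ih F' (exp1 mp n m (P', vis') c).1 (exp1 mp n m (P', vis') c).2
    cases F with
    | cons c F' => exact hcons c F' P vis
    | nil =>
      cases P with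
      | nil => simp [aBfs, lvlrun, flatQ]
      | cons p P' =>
        have hsh : lvlrun mp n m (f + 1) [] (p :: P') vis = lvlrun mp n m (f + 1) (p :: P') [] vis := by
          simp [lvlrun]
        rw [hsh]
        have := hcons p P' [] vis
        simpa [flatQ] using this

-- processing a goal-free prefix of the current level is the exp1 fold
theorem lvlrun_pass (mp : List (List Char)) (n m : Int) :
    ∀ (F1 : List (Int × Int)) (rest P : List (Int × Int)) (vis : List (List Int)) (f : Nat),
      (∀ c ∈ F1, aAt mp c.1 c.2 ≠ 'G') →
      lvlrun mp n m (f + F1.length) (F1 ++ rest) P vis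
        = lvlrun mp n m f rest (F1.foldl (exp1 mp n m) (P, vis)).1 (F1.foldl (exp1 mp n m) (P, vis)).2 := by
  intro F1
  induction F1 with
  | nil => intro rest P vis f _; rfl
  | cons c F1 ih =>
    intro rest P vis f hng
    have hlen : f + (c :: F1).length = (f + F1.length) + 1 := by simp; omega
    rw [hlen]
    have hstep : lvlrun mp n m ((f + F1.length) + 1) ((c :: F1) ++ rest) P vis
        = lvlrun mp n m (f + F1.length) (F1 ++ rest) (exp1 mp n m (P, vis) c).1 (exp1 mp n m (P, vis) c).2 := by
      simp only [List.cons_append, lvlrun, if_neg (hng c (by simp))]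
    rw [hstep, ih rest _ _ _ (fun c' hc' => hng c' (by simp [hc']))]
    simp

theorem seekG_none (pred : Nat → Bool) :
    ∀ (f j : Nat), (∀ d, j ≤ d → pred d = false) → seekG pred f j = none := by
  intro f
  induction f with
  | zero => intro j _; rfl
  | succ f ih =>
    intro j h
    simp only [seekG, h j (le_refl j)]
    exact ih (j + 1) (fun d hd => h d (by omega))

theorem seekG_some (pred : Nat → Bool) :
    ∀ (f j d : Nat), seekG pred f j = some d →
      j ≤ d ∧ d < j + f ∧ pred d = true ∧ ∀ e, j ≤ e → e < d → pred e = false := by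
  intro f
  induction f with
  | zero => intro j d h; cases h
  | succ f ih =>
    intro j d h
    simp only [seekG] at h
    by_cases hp : pred j
    · rw [if_pos hp] at h
      cases h
      exact ⟨le_refl _, by omega, hp, fun e he1 he2 => by omega⟩
    · rw [if_neg hp] at h
      obtain ⟨h1, h2, h3, h4⟩ := ih (j + 1) d h
      refine ⟨by omega, by omega, h3, fun e he1 he2 => ?_⟩
      by_cases he : e = j
      · subst he; simpa using hp
      · exact h4 e (by omega) he2

theorem seekG_succ_of_far (pred : Nat → Bool) :
    ∀ (f j : Nat), pred (j + f) = false → seekG pred (f + 1) j = seekG pred f j := by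
  intro f
  induction f with
  | zero => intro j h; simp only [seekG]; rw [if_neg (by simpa using h)]
  | succ f ih =>
    intro j h
    simp only [seekG]
    by_cases hp : pred j
    · rw [if_pos hp, if_pos hp]
    · rw [if_neg hp, if_neg hp]
      exact ih (j + 1) (by rw [← h]; ring_nf)

-- invariant of the expansion fold over one level: vis is the base vis overwritten with val+1
-- exactly on the accumulated fresh cells
def EInv (mp : List (List Char)) (n m : Int) (vb : List (List Int)) (val : Int)
    (st : List (Int × Int) × List (List Int)) : Prop :=
  Shape n.toNat m.toNat st.2 ∧
  (∀ i k : Int, 0 ≤ i → i < n → 0 ≤ k → k < m →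
    aGet2 st.2 i k = if (i, k) ∈ st.1 then val + 1 else aGet2 vb i k) ∧
  (∀ v ∈ st.1, CellOK mp n m v ∧ aGet2 vb v.1 v.2 = 0) ∧
  st.1.Nodup

def estep (u : Int × Int) (st : List (Int × Int) × List (List Int)) (p : Int × Int) :
    List (Int × Int) × List (List Int) :=
  if aGet2 st.2 p.1 p.2 = 0 then
    (st.1 ++ [p], aSet2 st.2 p.1 p.2 (aGet2 st.2 u.1 u.2 + 1))
  else st

theorem efold_char (mp : List (List Char)) (n m : Int) (vb : List (List Int)) (val : Int)
    (hv0 : val ≠ 0) (hv1 : val + 1 ≠ 0) (u : Int × Int)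
    (hu : CellOK mp n m u) (huv : aGet2 vb u.1 u.2 = val) :
    ∀ (ns : List (Int × Int)) (st : List (Int × Int) × List (List Int)),
      EInv mp n m vb val st → (∀ p ∈ ns, CellOK mp n m p) →
      EInv mp n m vb val (ns.foldl (estep u) st) ∧
      (∀ v, v ∈ (ns.foldl (estep u) st).1 ↔ v ∈ st.1 ∨ (aGet2 vb v.1 v.2 = 0 ∧ v ∈ ns)) := by
  intro ns
  induction ns with
  | nil =>
    intro st hI _
    exact ⟨hI, fun v => by simp⟩
  | cons p ns ih =>
    intro st hI hns
    obtain ⟨hsh, hvis, hok, hnd⟩ := hI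
    have hp : CellOK mp n m p := hns p (by simp)
    obtain ⟨hp1, hp2, hp3, hp4, hp5⟩ := hp
    have hvp : aGet2 st.2 p.1 p.2 = if (p.1, p.2) ∈ st.1 then val + 1 else aGet2 vb p.1 p.2 :=
      hvis p.1 p.2 hp1 hp2 hp3 hp4
    simp only [List.foldl_cons]
    by_cases hmem : (p.1, p.2) ∈ st.1
    · have hne : ¬ aGet2 st.2 p.1 p.2 = 0 := by rw [hvp, if_pos hmem]; exact hv1
      have hskip : estep u st p = st := by unfold estep; rw [if_neg hne]
      rw [hskip]
      obtain ⟨hI', hM'⟩ := ih st ⟨hsh, hvis, hok, hnd⟩ (fun q hq => hns q (by simp [hq]))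
      refine ⟨hI', fun v => ?_⟩
      rw [hM' v]
      constructor
      · rintro (h | ⟨h1, h2⟩)
        · exact Or.inl h
        · exact Or.inr ⟨h1, by simp [h2]⟩
      · rintro (h | ⟨h1, h2⟩)
        · exact Or.inl h
        · simp only [List.mem_cons] at h2
          rcases h2 with rfl | h2
          · exact Or.inl (by simpa using hmem)
          · exact Or.inr ⟨h1, h2⟩
    · by_cases hfresh : aGet2 vb p.1 p.2 = 0
      · have hz : aGet2 st.2 p.1 p.2 = 0 := by rw [hvp, if_neg hmem]; exact hfresh
        -- u is never in the accumulator (its base value is val ≠ 0), so its entry reads val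
        have humem : (u.1, u.2) ∉ st.1 := by
          intro hc
          have hval0 := (hok _ hc).2
          simp only at hval0
          rw [huv] at hval0
          exact hv0 hval0
        have hru : aGet2 st.2 u.1 u.2 = val := by
          rw [hvis u.1 u.2 hu.1 hu.2.1 hu.2.2.1 hu.2.2.2.1, if_neg humem, huv]
        have hadd : estep u st p = (st.1 ++ [p], aSet2 st.2 p.1 p.2 (val + 1)) := by
          unfold estep; rw [if_pos hz, hru]
        rw [hadd]
        have hsh' : Shape n.toNat m.toNat (aSet2 st.2 p.1 p.2 (val + 1)) :=
          shape_set _ _ _ _ _ _ hsh hp1 (by omega) hp3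
        have hvis' : ∀ i k : Int, 0 ≤ i → i < n → 0 ≤ k → k < m →
            aGet2 (aSet2 st.2 p.1 p.2 (val + 1)) i k
              = if (i, k) ∈ st.1 ++ [p] then val + 1 else aGet2 vb i k := by
          intro i k hi1 hi2 hk1 hk2
          rw [get2_set2 n.toNat m.toNat st.2 p.1 p.2 i k _ hsh hp1 (by omega) hp3 (by omega)
              hi1 (by omega) hk1 (by omega)]
          by_cases hik : i = p.1 ∧ k = p.2
          · have hikp : (i, k) = p := by obtain ⟨a, b⟩ := p; simp only at hik ⊢; simp [hik]
            rw [if_pos hik, if_pos (by simp [hikp])]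
          · rw [if_neg hik, hvis i k hi1 hi2 hk1 hk2]
            have hiff : ((i, k) ∈ st.1 ++ [p]) ↔ ((i, k) ∈ st.1) := by
              simp only [List.mem_append, List.mem_singleton, or_iff_left_iff_imp]
              rintro rfl
              exact (hik ⟨rfl, rfl⟩).elim
            rw [if_congr hiff rfl rfl]
        have hok' : ∀ v ∈ st.1 ++ [p], CellOK mp n m v ∧ aGet2 vb v.1 v.2 = 0 := by
          intro v hv
          simp only [List.mem_append, List.mem_singleton] at hv
          rcases hv with hv | rfl
          · exact hok v hv
          · exact ⟨⟨hp1, hp2, hp3, hp4, hp5⟩, hfresh⟩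
        have hnd' : (st.1 ++ [p]).Nodup := by
          refine hnd.append (List.nodup_singleton p) ?_
          intro x hx hx2
          simp only [List.mem_singleton] at hx2
          subst hx2
          exact hmem (by simpa using hx)
        obtain ⟨hI', hM'⟩ := ih (st.1 ++ [p], aSet2 st.2 p.1 p.2 (val + 1))
          ⟨hsh', hvis', hok', hnd'⟩ (fun q hq => hns q (by simp [hq]))
        refine ⟨hI', fun v => ?_⟩
        rw [hM' v]
        simp only [List.mem_append, List.mem_cons, List.not_mem_nil, or_false]
        constructor
        · rintro ((h | rfl) | ⟨h1, h2⟩)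
          · exact Or.inl h
          · exact Or.inr ⟨hfresh, Or.inl rfl⟩
          · exact Or.inr ⟨h1, Or.inr h2⟩
        · rintro (h | ⟨h1, rfl | h2⟩)
          · exact Or.inl (Or.inl h)
          · exact Or.inl (Or.inr rfl)
          · exact Or.inr ⟨h1, h2⟩
      · have hne : ¬ aGet2 st.2 p.1 p.2 = 0 := by rw [hvp, if_neg hmem]; exact hfresh
        have hskip : estep u st p = st := by unfold estep; rw [if_neg hne]
        rw [hskip]
        obtain ⟨hI', hM'⟩ := ih st ⟨hsh, hvis, hok, hnd⟩ (fun q hq => hns q (by simp [hq]))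
        refine ⟨hI', fun v => ?_⟩
        rw [hM' v]
        constructor
        · rintro (h | ⟨h1, h2⟩)
          · exact Or.inl h
          · exact Or.inr ⟨h1, by simp [h2]⟩
        · rintro (h | ⟨h1, h2⟩)
          · exact Or.inl h
          · simp only [List.mem_cons] at h2
            rcases h2 with rfl | h2
            · exact absurd h1 hfresh
            · exact Or.inr ⟨h1, h2⟩

-- the whole-level fold: the next frontier is exactly the fresh slide-successors of the level
theorem lfold_char (mp : List (List Char)) (n m : Int) (vb : List (List Int)) (val : Int)
    (hv0 : val ≠ 0) (hv1 : val + 1 ≠ 0) :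
    ∀ (L : List (Int × Int)) (st : List (Int × Int) × List (List Int)),
      EInv mp n m vb val st →
      (∀ u ∈ L, CellOK mp n m u ∧ aGet2 vb u.1 u.2 = val) →
      EInv mp n m vb val (L.foldl (exp1 mp n m) st) ∧
      (∀ v, v ∈ (L.foldl (exp1 mp n m) st).1 ↔
        v ∈ st.1 ∨ (aGet2 vb v.1 v.2 = 0 ∧ ∃ u ∈ L, v ∈ nb mp n m u)) := by
  intro L
  induction L with
  | nil =>
    intro st hI _
    exact ⟨hI, fun v => by simp⟩
  | cons u L ih =>
    intro st hI hL
    have hu := hL u (by simp)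
    have hstep := efold_char mp n m vb val hv0 hv1 u hu.1 hu.2 (nb mp n m u) st hI
      (nb_ok mp n m u hu.1)
    simp only [List.foldl_cons]
    have hexp : exp1 mp n m st u = (nb mp n m u).foldl (estep u) st := rfl
    rw [hexp]
    obtain ⟨hI', hM'⟩ := hstep
    obtain ⟨hI'', hM''⟩ := ih _ hI' (fun u' hu' => hL u' (by simp [hu']))
    refine ⟨hI'', fun v => ?_⟩
    rw [hM'' v, hM' v]
    constructor
    · rintro ((h | ⟨h1, h2⟩) | ⟨h1, u', hu', h2⟩)
      · exact Or.inl h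
      · exact Or.inr ⟨h1, u, by simp, h2⟩
      · exact Or.inr ⟨h1, u', by simp [hu'], h2⟩
    · rintro (h | ⟨h1, u', hu', h2⟩)
      · exact Or.inl (Or.inl h)
      · simp only [List.mem_cons] at hu'
        rcases hu' with rfl | hu'
        · exact Or.inl (Or.inr ⟨h1, h2⟩)
        · exact Or.inr ⟨h1, u', hu', h2⟩

-- B's relaxation step on one (candidate distance, target cell) pair
def relax1 (new : PySem.Dict (Int × Int) Int) (q : Int × (Int × Int)) : PySem.Dict (Int × Int) Int :=
  if new.contains q.2 = false ∨ new.getD q.2 0 > q.1 then new.insert q.2 q.1 else new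

-- one bRound is the relax1 fold over the flattened candidate list
theorem bRound_eq (g : List (List Char)) (n m : Int) (dist : PySem.Dict (Int × Int) Int) :
    bRound g n m dist
      = (dist.items.flatMap (fun p => (nb g n m p.1).map (fun v => (p.2 + 1, v)))).foldl
          relax1 dist := by
  rw [List.foldl_flatMap]
  unfold bRound
  apply List.foldl_ext
  intro new p _
  rw [List.foldl_map]
  unfold nb
  rw [List.foldl_map]
  rfl

-- invariant of the relaxation fold: entries are the old ones plus fresh cells at value val
def RInv (dist new : PySem.Dict (Int × Int) Int) (val : Int) : Prop :=
  new.keys.Nodup ∧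
  ∀ v, new.get? v = dist.get? v ∨ (dist.get? v = none ∧ new.get? v = some val)

theorem relax_run (dist : PySem.Dict (Int × Int) Int) (val : Int) :
    ∀ (L : List (Int × (Int × Int))) (new : PySem.Dict (Int × Int) Int),
      (∀ q ∈ L, (∃ dv, dist.get? q.2 = some dv ∧ dv ≤ q.1) ∨ (dist.get? q.2 = none ∧ q.1 = val)) →
      RInv dist new val →
      RInv dist (L.foldl relax1 new) val ∧
      (∀ v, (L.foldl relax1 new).get? v = new.get? v ∨ ∃ q ∈ L, q.2 = v) ∧
      (∀ v, new.contains v = true → (L.foldl relax1 new).get? v = new.get? v) ∧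
      (∀ q ∈ L, (L.foldl relax1 new).contains q.2 = true) := by
  intro L
  induction L with
  | nil =>
    intro new _ hI
    exact ⟨hI, fun v => Or.inl rfl, fun v _ => rfl, fun q hq => absurd hq List.not_mem_nil⟩
  | cons q L ih =>
    intro new hq hI
    obtain ⟨hnd, hch⟩ := hI
    -- the step either leaves new unchanged or inserts (q.2, val) at a fresh key
    have hstep : relax1 new q = new ∨
        (relax1 new q = new.insert q.2 val ∧ dist.get? q.2 = none ∧ new.get? q.2 = none) := by
      rcases hq q (by simp) with ⟨dv, hdv, hle⟩ | ⟨hnone, hval⟩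
      · have hgv : new.get? q.2 = some dv := by
          rcases hch q.2 with h | ⟨h1, _⟩
          · rw [h, hdv]
          · rw [h1] at hdv; cases hdv
        have hcont : new.contains q.2 = true := by
          rw [PySem.Dict.contains_eq_isSome_get?, hgv]; rfl
        have hnotgt : ¬ new.getD q.2 0 > q.1 := by
          rw [PySem.Dict.getD_eq_get?_getD, hgv]; simpa using hle
        left
        unfold relax1
        rw [if_neg]
        rintro (h | h)
        · rw [hcont] at h; cases h
        · exact hnotgt h
      · rcases hch q.2 with h | ⟨h1, h2⟩
        · rw [hnone] at h
          right
          refine ⟨?_, hnone, h⟩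
          unfold relax1
          rw [if_pos (Or.inl (by rw [PySem.Dict.contains_eq_isSome_get?, h]; rfl)), hval]
        · have hcont : new.contains q.2 = true := by
            rw [PySem.Dict.contains_eq_isSome_get?, h2]; rfl
          have hnotgt : ¬ new.getD q.2 0 > q.1 := by
            rw [PySem.Dict.getD_eq_get?_getD, h2, hval]; simp
          left
          unfold relax1
          rw [if_neg]
          rintro (h | h)
          · rw [hcont] at h; cases h
          · exact hnotgt h
    have hIstep : RInv dist (relax1 new q) val := by
      rcases hstep with h | ⟨h, hn1, hn2⟩
      · rw [h]; exact ⟨hnd, hch⟩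
      · refine ⟨by rw [h]; exact PySem.Dict.nodup_keys_insert _ _ _ hnd, fun v => ?_⟩
        by_cases hv : v = q.2
        · subst hv
          rw [h, PySem.Dict.get?_insert_self]
          exact Or.inr ⟨hn1, rfl⟩
        · rw [h, PySem.Dict.get?_insert_of_ne _ _ hv]
          exact hch v
    have hpres : ∀ v, v ≠ q.2 → (relax1 new q).get? v = new.get? v := by
      intro v hv
      rcases hstep with h | ⟨h, _, _⟩
      · rw [h]
      · rw [h, PySem.Dict.get?_insert_of_ne _ _ hv]
    have hkeep1 : ∀ v, new.contains v = true → (relax1 new q).get? v = new.get? v := by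
      intro v hv
      rcases hstep with h | ⟨h, _, hn2⟩
      · rw [h]
      · have hvne : v ≠ q.2 := by
          intro he
          subst he
          rw [PySem.Dict.contains_eq_isSome_get?, hn2] at hv
          cases hv
        rw [h, PySem.Dict.get?_insert_of_ne _ _ hvne]
    have hcq : (relax1 new q).contains q.2 = true := by
      unfold relax1
      split_ifs with hcond
      · exact PySem.Dict.contains_insert_self _ _ _
      · push_neg at hcond
        simpa using hcond.1
    obtain ⟨hIfin, hany, hkeep, htgt⟩ := ih (relax1 new q)
      (fun q' hq' => hq q' (by simp [hq'])) hIstep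
    simp only [List.foldl_cons]
    refine ⟨hIfin, ?_, ?_, ?_⟩
    · intro v
      by_cases hv : v = q.2
      · exact Or.inr ⟨q, by simp, hv.symm⟩
      · rcases hany v with h | ⟨q', hq', hv'⟩
        · rw [h, hpres v hv]; exact Or.inl rfl
        · exact Or.inr ⟨q', by simp [hq'], hv'⟩
    · intro v hv
      have hstep_eq := hkeep1 v hv
      have hcont' : (relax1 new q).contains v = true := by
        rw [PySem.Dict.contains_eq_isSome_get?, hstep_eq,
          ← PySem.Dict.contains_eq_isSome_get?, hv]
      rw [hkeep v hcont', hstep_eq]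
    · intro q' hq'
      simp only [List.mem_cons] at hq'
      rcases hq' with rfl | hq'
      · have hsome : ((relax1 new q').get? q'.2).isSome := by
          rw [← PySem.Dict.contains_eq_isSome_get?]; exact hcq
        obtain ⟨d, hd⟩ := Option.isSome_iff_exists.mp hsome
        rw [PySem.Dict.contains_eq_isSome_get?, hkeep q'.2 hcq, hd]; rfl
      · exact htgt q' hq'

-- frontier, visited matrix and distance dict at level j (start cell s)
def Fj (mp : List (List Char)) (n m : Int) (s : Int × Int) (vis1 : List (List Int)) (j : Nat) :
    List (Int × Int) := (levels mp n m [s] vis1 j).1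
def Vj (mp : List (List Char)) (n m : Int) (s : Int × Int) (vis1 : List (List Int)) (j : Nat) :
    List (List Int) := (levels mp n m [s] vis1 j).2
def Dj (mp : List (List Char)) (n m : Int) (s : Int × Int) (j : Nat) :
    PySem.Dict (Int × Int) Int := distIter mp n m ((PySem.Dict.empty).insert s 0) j

-- the full correspondence between A's level-BFS state and B's distance dict after j rounds
def Corr (mp : List (List Char)) (n m : Int) (s : Int × Int) (vis1 : List (List Int)) (j : Nat) : Prop :=
  Shape n.toNat m.toNat (Vj mp n m s vis1 j) ∧
  (Dj mp n m s j).keys.Nodup ∧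
  (∀ c d, (Dj mp n m s j).get? c = some d → 0 ≤ d ∧ d ≤ (j : Int) ∧ CellOK mp n m c) ∧
  (∀ i k : Int, 0 ≤ i → i < n → 0 ≤ k → k < m →
    aGet2 (Vj mp n m s vis1 j) i k = (((Dj mp n m s j).get? (i, k)).map (· + 1)).getD 0) ∧
  (∀ d : Nat, d ≤ j → ∀ c, ((Dj mp n m s j).get? c = some (d : Int) ↔ c ∈ Fj mp n m s vis1 d)) ∧
  (∀ u du, (Dj mp n m s j).get? u = some du → du < (j : Int) →
    ∀ v ∈ nb mp n m u, ∃ dv, (Dj mp n m s j).get? v = some dv ∧ dv ≤ du + 1) ∧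
  (Fj mp n m s vis1 j).Nodup ∧
  (∀ c ∈ Fj mp n m s vis1 j, CellOK mp n m c)

theorem corr_zero (mp : List (List Char)) (n m : Int) (s : Int × Int)
    (hs : CellOK mp n m s)
    (vis1 : List (List Int))
    (hv1 : vis1 = aSet2 ((PySem.List.pyRange 0 n 1).map (fun _ => List.replicate m.toNat 0)) s.1 s.2 1) :
    Corr mp n m s vis1 0 := by
  obtain ⟨hs1, hs2, hs3, hs4, hs5⟩ := hs
  have hsh0 : Shape n.toNat m.toNat ((PySem.List.pyRange 0 n 1).map (fun _ => List.replicate m.toNat (0 : Int))) := by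
    constructor
    · simp [PySem.List.length_pyRange_one]
    · intro row hrow
      simp only [List.mem_map] at hrow
      obtain ⟨_, _, rfl⟩ := hrow
      simp
  have hz : ∀ i k : Int, 0 ≤ i → i < n → 0 ≤ k → k < m →
      aGet2 ((PySem.List.pyRange 0 n 1).map (fun _ => List.replicate m.toNat (0 : Int))) i k = 0 := by
    intro i k hi1 hi2 hk1 hk2
    unfold aGet2
    rw [PySem.List.pyGetD_eq_getElem _ [] hi1 (by simp [PySem.List.length_pyRange_one]; omega)]
    rw [List.getElem_map]
    rw [PySem.List.pyGetD_eq_getElem _ 0 hk1 (by simp; omega)]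
    simp
  have hd0 : ∀ c, (Dj mp n m s 0).get? c = if c = s then some 0 else none := by
    intro c
    show ((PySem.Dict.empty).insert s (0 : Int)).get? c = _
    by_cases hc : c = s
    · subst hc; rw [PySem.Dict.get?_insert_self, if_pos rfl]
    · rw [PySem.Dict.get?_insert_of_ne _ _ hc, if_neg hc]
      exact PySem.Dict.get?_empty _
  refine ⟨?_, ?_, ?_, ?_, ?_, ?_, ?_, ?_⟩
  · show Shape n.toNat m.toNat vis1
    rw [hv1]
    exact shape_set _ _ _ _ _ _ hsh0 hs1 (by omega) hs3
  · show ((PySem.Dict.empty).insert s (0 : Int)).keys.Nodup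
    exact PySem.Dict.nodup_keys_insert _ _ _ (by simpa using PySem.Dict.nodup_keys_empty (κ := Int × Int) (ν := Int))
  · intro c d hc
    rw [hd0 c] at hc
    by_cases hcs : c = s
    · rw [if_pos hcs] at hc
      cases hc
      subst hcs
      exact ⟨le_refl _, by simp, hs1, hs2, hs3, hs4, hs5⟩
    · rw [if_neg hcs] at hc; cases hc
  · intro i k hi1 hi2 hk1 hk2
    show aGet2 vis1 i k = _
    rw [hv1, get2_set2 n.toNat m.toNat _ s.1 s.2 i k _ hsh0 hs1 (by omega) hs3 (by omega)
        hi1 (by omega) hk1 (by omega), hd0]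
    by_cases hik : i = s.1 ∧ k = s.2
    · have hie : (i, k) = s := by obtain ⟨a, b⟩ := s; simp only at hik ⊢; simp [hik]
      rw [if_pos hik, if_pos hie]
      rfl
    · have hie : (i, k) ≠ s := by
        rintro rfl
        exact hik ⟨rfl, rfl⟩
      rw [if_neg hik, if_neg hie, hz i k hi1 hi2 hk1 hk2]
      rfl
  · intro d hd c
    have hdz : d = 0 := by omega
    subst hdz
    rw [hd0 c]
    show _ ↔ c ∈ [s]
    by_cases hc : c = s
    · subst hc; simp
    · rw [if_neg hc]
      simp [hc]
  · intro u du hu hdu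
    have := ((by
      rw [hd0 u] at hu
      by_cases hc : u = s
      · rw [if_pos hc] at hu; cases hu; exact le_refl (0 : Int)
      · rw [if_neg hc] at hu; cases hu) : (0 : Int) ≤ du)
    omega
  · show ([s] : List (Int × Int)).Nodup
    simp
  · intro c hc
    have hc2 : c ∈ [s] := hc
    simp only [List.mem_singleton] at hc2
    subst hc2
    exact ⟨hs1, hs2, hs3, hs4, hs5⟩

set_option maxHeartbeats 1000000 in
theorem corr_step (mp : List (List Char)) (n m : Int) (s : Int × Int) (vis1 : List (List Int))
    (j : Nat) (hC : Corr mp n m s vis1 j) : Corr mp n m s vis1 (j + 1) := by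
  obtain ⟨hsh, hnd, hb, ha, hcs, hdcl, hfnd, hfok⟩ := hC
  set F := Fj mp n m s vis1 j with hF
  set vis := Vj mp n m s vis1 j with hvis
  set dist := Dj mp n m s j with hdist
  have hval0 : ((j : Int) + 1) ≠ 0 := by omega
  have hval1 : ((j : Int) + 1) + 1 ≠ 0 := by omega
  -- each frontier cell carries value j+1 in vis and j in dist
  have hFval : ∀ u ∈ F, CellOK mp n m u ∧ aGet2 vis u.1 u.2 = (j : Int) + 1 := by
    intro u hu
    have hok := hfok u hu
    have hdu : dist.get? u = some (j : Int) := ((hcs j (le_refl j) u).mpr hu)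
    refine ⟨hok, ?_⟩
    rw [ha u.1 u.2 hok.1 hok.2.1 hok.2.2.1 hok.2.2.2.1]
    simp [hdu]
  -- freshness bridge
  have hfresh : ∀ v, CellOK mp n m v → (aGet2 vis v.1 v.2 = 0 ↔ dist.get? v = none) := by
    intro v hok
    rw [ha v.1 v.2 hok.1 hok.2.1 hok.2.2.1 hok.2.2.2.1]
    cases hg : dist.get? (v.1, v.2) with
    | none => simp
    | some d =>
      have := (hb _ d hg).1
      simp only [Option.map_some, Option.getD_some]
      constructor
      · intro h; omega
      · intro h; cases h
  -- the expansion fold over the level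
  have hE0 : EInv mp n m vis ((j : Int) + 1) ([], vis) := by
    refine ⟨hsh, ?_, ?_, List.nodup_nil⟩
    · intro i k _ _ _ _
      simp
    · intro v hv
      exact absurd hv List.not_mem_nil
  obtain ⟨hEI, hEM⟩ := lfold_char mp n m vis ((j : Int) + 1) hval0 hval1 F ([], vis) hE0 hFval
  obtain ⟨hsh', hvis', hok', hnd'⟩ := hEI
  have hFj1 : Fj mp n m s vis1 (j + 1) = (F.foldl (exp1 mp n m) ([], vis)).1 := rfl
  have hVj1 : Vj mp n m s vis1 (j + 1) = (F.foldl (exp1 mp n m) ([], vis)).2 := rfl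
  -- membership in the next frontier
  have hM : ∀ v, v ∈ Fj mp n m s vis1 (j + 1) ↔
      (aGet2 vis v.1 v.2 = 0 ∧ ∃ u ∈ F, v ∈ nb mp n m u) := by
    intro v
    rw [hFj1, hEM v]
    simp
  -- the relaxation fold over the candidate list
  have hL : ∀ q ∈ dist.items.flatMap (fun p => (nb mp n m p.1).map (fun v => (p.2 + 1, v))),
      (∃ dv, dist.get? q.2 = some dv ∧ dv ≤ q.1) ∨
      (dist.get? q.2 = none ∧ q.1 = (j : Int) + 1) := by
    intro q hq
    simp only [List.mem_flatMap, List.mem_map] at hq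
    obtain ⟨p, hp, v, hv, rfl⟩ := hq
    have hgp : dist.get? p.1 = some p.2 := PySem.Dict.get?_of_mem_items _ hp hnd
    have hbp := hb p.1 p.2 hgp
    cases hgv : dist.get? v with
    | some dv =>
      left
      refine ⟨dv, rfl, ?_⟩
      rcases lt_or_eq_of_le hbp.2.1 with hlt | heq
      · obtain ⟨dv', hdv', hle'⟩ := hdcl p.1 p.2 hgp hlt v hv
        rw [hgv] at hdv'
        cases hdv'
        exact hle'
      · have := (hb v dv hgv).2.1
        omega
    | none =>
      right
      refine ⟨rfl, ?_⟩
      rcases lt_or_eq_of_le hbp.2.1 with hlt | heq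
      · obtain ⟨dv', hdv', _⟩ := hdcl p.1 p.2 hgp hlt v hv
        rw [hgv] at hdv'
        cases hdv'
      · rw [heq]
  obtain ⟨hRI, hany, hkeep, htgt⟩ := relax_run dist ((j : Int) + 1)
    (dist.items.flatMap (fun p => (nb mp n m p.1).map (fun v => (p.2 + 1, v)))) dist hL
    ⟨hnd, fun v => Or.inl rfl⟩
  set Lc := dist.items.flatMap (fun p => (nb mp n m p.1).map (fun v => (p.2 + 1, v))) with hLc
  set dist' := Lc.foldl relax1 dist with hdist'
  have hDj1 : Dj mp n m s (j + 1) = dist' := by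
    show bRound mp n m dist = dist'
    rw [hdist', hLc]
    exact bRound_eq mp n m dist
  have hold : ∀ v d, dist.get? v = some d → dist'.get? v = some d := by
    intro v d h
    rw [hkeep v (by rw [PySem.Dict.contains_eq_isSome_get?, h]; rfl), h]
  have hchar : ∀ v d, dist'.get? v = some d →
      dist.get? v = some d ∨ (dist.get? v = none ∧ d = (j : Int) + 1) := by
    intro v d h
    rcases hRI.2 v with hx | ⟨hx1, hx2⟩
    · rw [h] at hx
      exact Or.inl hx.symm
    · rw [h] at hx2
      cases hx2
      exact Or.inr ⟨hx1, rfl⟩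
  have hnew : ∀ v, (dist'.get? v = some ((j : Int) + 1) ∧ dist.get? v = none) ↔
      v ∈ Fj mp n m s vis1 (j + 1) := by
    intro v
    constructor
    · rintro ⟨hv', hvn⟩
      rcases hany v with hx | ⟨q, hq, rfl⟩
      · rw [hv', hvn] at hx; cases hx
      · simp only [hLc, List.mem_flatMap, List.mem_map] at hq
        obtain ⟨p, hp, w, hw, hwq⟩ := hq
        have hq2 : w = q.2 := congrArg Prod.snd hwq
        subst hq2
        have hgp : dist.get? p.1 = some p.2 := PySem.Dict.get?_of_mem_items _ hp hnd
        have hbp := hb p.1 p.2 hgp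
        have hpj : p.2 = (j : Int) := by
          rcases lt_or_eq_of_le hbp.2.1 with hlt | heq
          · obtain ⟨dv', hdv', _⟩ := hdcl p.1 p.2 hgp hlt q.2 hw
            rw [hvn] at hdv'
            cases hdv'
          · exact heq
        have hpF : p.1 ∈ F := (hcs j (le_refl j) p.1).mp (by rw [← hpj]; exact hgp)
        have hcok : CellOK mp n m q.2 := nb_ok mp n m p.1 hbp.2.2 q.2 hw
        rw [hM q.2]
        exact ⟨(hfresh q.2 hcok).mpr hvn, p.1, hpF, hw⟩
    · intro hv
      have hv2 := hv
      rw [hM v] at hv2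
      obtain ⟨hvz, u, hu, hvnb⟩ := hv2
      have hcoku : CellOK mp n m u := hfok u hu
      have hcokv : CellOK mp n m v := nb_ok mp n m u hcoku v hvnb
      have hvn : dist.get? v = none := (hfresh v hcokv).mp hvz
      have hgu : dist.get? u = some (j : Int) := (hcs j (le_refl j) u).mpr hu
      have hpitems : (u, (j : Int)) ∈ dist.items := PySem.Dict.mem_items_of_get?_eq_some _ hgu
      have hqL : ((j : Int) + 1, v) ∈ Lc := by
        rw [hLc]
        simp only [List.mem_flatMap, List.mem_map]
        exact ⟨(u, (j : Int)), hpitems, v, hvnb, rfl⟩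
      have hcont := htgt ((j : Int) + 1, v) hqL
      have hsome : (dist'.get? v).isSome := by
        rw [← PySem.Dict.contains_eq_isSome_get?]
        exact hcont
      obtain ⟨d, hd⟩ := Option.isSome_iff_exists.mp hsome
      rcases hchar v d hd with hx | ⟨_, hx2⟩
      · rw [hvn] at hx; cases hx
      · subst hx2
        exact ⟨hd, hvn⟩
  -- assemble Corr (j + 1)
  refine ⟨?_, ?_, ?_, ?_, ?_, ?_, ?_, ?_⟩
  · rw [hVj1]; exact hsh'
  · rw [hDj1]; exact hRI.1
  · intro c d h
    rw [hDj1] at h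
    rcases hchar c d h with hx | ⟨hx1, hx2⟩
    · have := hb c d hx
      refine ⟨this.1, ?_, this.2.2⟩
      push_cast
      omega
    · subst hx2
      have hmemF : c ∈ Fj mp n m s vis1 (j + 1) := (hnew c).mp ⟨by rw [← hDj1]; rw [hDj1]; exact h, hx1⟩
      refine ⟨by omega, by push_cast; omega, (hok' c (by rw [← hFj1]; exact hmemF)).1⟩
  · intro i k hi1 hi2 hk1 hk2
    rw [hVj1, hDj1]
    rw [hvis' i k hi1 hi2 hk1 hk2]
    by_cases hmemF : (i, k) ∈ (F.foldl (exp1 mp n m) ([], vis)).1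
    · rw [if_pos hmemF]
      have hik := (hnew (i, k)).mpr (by rw [hFj1]; exact hmemF)
      rw [hik.1]
      simp only [Option.map_some, Option.getD_some]
    · rw [if_neg hmemF]
      have hsame : dist'.get? (i, k) = dist.get? (i, k) := by
        cases hg : dist.get? (i, k) with
        | some d => rw [hold _ d hg]
        | none =>
          cases hg' : dist'.get? (i, k) with
          | none => rfl
          | some d' =>
            rcases hchar _ d' hg' with hx | ⟨_, hx2⟩
            · rw [hg] at hx; cases hx
            · subst hx2
              exact absurd ((hnew (i, k)).mp ⟨hg', hg⟩) (by rw [hFj1]; exact hmemF)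
      rw [hsame]
      exact ha i k hi1 hi2 hk1 hk2
  · intro d hd c
    rw [hDj1]
    by_cases hdj : d ≤ j
    · constructor
      · intro h
        rcases hchar c _ h with hx | ⟨_, hx2⟩
        · exact (hcs d hdj c).mp hx
        · exfalso; omega
      · intro h
        exact hold c _ ((hcs d hdj c).mpr h)
    · have hdj1 : d = j + 1 := by omega
      subst hdj1
      constructor
      · intro h
        rcases hchar c _ h with hx | ⟨hx1, _⟩
        · have := (hb c _ hx).2.1
          exfalso
          push_cast at this
          omega
        · refine (hnew c).mp ⟨?_, hx1⟩
          rw [h]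
          congr 1
      · intro h
        have hgc := ((hnew c).mpr h).1
        rw [hgc]
        congr 1
  · intro u du h hlt v hv
    rw [hDj1] at h ⊢
    rcases hchar u du h with hx | ⟨_, hx2⟩
    · have hbu := hb u du hx
      rcases lt_or_eq_of_le hbu.2.1 with hltj | heqj
      · obtain ⟨dv, hdv, hle⟩ := hdcl u du hx hltj v hv
        exact ⟨dv, hold v dv hdv, hle⟩
      · have huF : u ∈ F := (hcs j (le_refl j) u).mp (by rw [← heqj]; exact hx)
        have hcokv : CellOK mp n m v := nb_ok mp n m u hbu.2.2 v hv
        cases hgv : dist.get? v with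
        | some dv =>
          have := (hb v dv hgv).2.1
          exact ⟨dv, hold v dv hgv, by omega⟩
        | none =>
          have hvF : v ∈ Fj mp n m s vis1 (j + 1) := by
            rw [hM v]
            exact ⟨(hfresh v hcokv).mpr hgv, u, huF, hv⟩
          have := ((hnew v).mpr hvF).1
          exact ⟨(j : Int) + 1, this, by omega⟩
    · exfalso
      push_cast at hlt
      omega
  · rw [hFj1]; exact hnd'
  · intro c hc
    rw [hFj1] at hc
    exact (hok' c hc).1

theorem corr_all (mp : List (List Char)) (n m : Int) (s : Int × Int)
    (hs : CellOK mp n m s)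
    (vis1 : List (List Int))
    (hv1 : vis1 = aSet2 ((PySem.List.pyRange 0 n 1).map (fun _ => List.replicate m.toNat 0)) s.1 s.2 1) :
    ∀ j, Corr mp n m s vis1 j := by
  intro j
  induction j with
  | zero => exact corr_zero mp n m s hs vis1 hv1
  | succ j ih => exact corr_step mp n m s vis1 j ih

-- number of unvisited in-board cells
def Zc (mp : List (List Char)) (n m : Int) (vis : List (List Int)) : Nat :=
  (bCells n m).countP (fun c => aGet2 vis c.1 c.2 == 0)

theorem corr_fval (mp : List (List Char)) (n m : Int) (s : Int × Int) (vis1 : List (List Int))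
    (j : Nat) (hC : Corr mp n m s vis1 j) :
    ∀ u ∈ Fj mp n m s vis1 j, CellOK mp n m u ∧ aGet2 (Vj mp n m s vis1 j) u.1 u.2 = (j : Int) + 1 := by
  obtain ⟨hsh, hnd, hb, ha, hcs, hdcl, hfnd, hfok⟩ := hC
  intro u hu
  have hok := hfok u hu
  have hdu : (Dj mp n m s j).get? u = some (j : Int) := (hcs j (le_refl j) u).mpr hu
  refine ⟨hok, ?_⟩
  rw [ha u.1 u.2 hok.1 hok.2.1 hok.2.2.1 hok.2.2.2.1]
  simp [hdu]

theorem level_facts (mp : List (List Char)) (n m : Int) (s : Int × Int) (vis1 : List (List Int))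
    (j : Nat) (hC : Corr mp n m s vis1 j) :
    (∀ i k : Int, 0 ≤ i → i < n → 0 ≤ k → k < m →
      aGet2 (Vj mp n m s vis1 (j + 1)) i k =
        if (i, k) ∈ Fj mp n m s vis1 (j + 1) then ((j : Int) + 1) + 1
        else aGet2 (Vj mp n m s vis1 j) i k) ∧
    (∀ c ∈ Fj mp n m s vis1 (j + 1), CellOK mp n m c ∧ aGet2 (Vj mp n m s vis1 j) c.1 c.2 = 0) ∧
    (Fj mp n m s vis1 (j + 1)).Nodup := by
  have hFval := corr_fval mp n m s vis1 j hC
  obtain ⟨hsh, _, _, _, _, _, _, _⟩ := hC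
  have hE0 : EInv mp n m (Vj mp n m s vis1 j) ((j : Int) + 1) ([], Vj mp n m s vis1 j) := by
    refine ⟨hsh, ?_, ?_, List.nodup_nil⟩
    · intro i k _ _ _ _; simp
    · intro v hv; exact absurd hv List.not_mem_nil
  obtain ⟨⟨hsh', hvis', hok', hnd'⟩, _⟩ := lfold_char mp n m (Vj mp n m s vis1 j) ((j : Int) + 1)
    (by omega) (by omega) (Fj mp n m s vis1 j) ([], Vj mp n m s vis1 j) hE0 hFval
  exact ⟨hvis', hok', hnd'⟩

-- each next-frontier cell consumes one distinct unvisited cell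
theorem zc_bound (mp : List (List Char)) (n m : Int) (s : Int × Int) (vis1 : List (List Int))
    (j : Nat) (hC : Corr mp n m s vis1 j) :
    Zc mp n m (Vj mp n m s vis1 (j + 1)) + (Fj mp n m s vis1 (j + 1)).length
      ≤ Zc mp n m (Vj mp n m s vis1 j) := by
  obtain ⟨hvis', hok', hnd'⟩ := level_facts mp n m s vis1 j hC
  set F' := Fj mp n m s vis1 (j + 1) with hF'
  have hcellrange : ∀ c ∈ F', c ∈ bCells n m := by
    intro c hc
    have := (hok' c hc).1
    exact (mem_bCells n m c).mpr ⟨this.1, this.2.1, this.2.2.1, this.2.2.2.1⟩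
  have hFnotz : ∀ c ∈ F', (aGet2 (Vj mp n m s vis1 (j + 1)) c.1 c.2 == 0) = false := by
    intro c hc
    have hok := (hok' c hc).1
    rw [hvis' c.1 c.2 hok.1 hok.2.1 hok.2.2.1 hok.2.2.2.1, if_pos (by simpa using hc)]
    simp
    omega
  have hA : ((bCells n m).filter (fun c => aGet2 (Vj mp n m s vis1 (j + 1)) c.1 c.2 == 0) ++ F').Nodup := by
    refine ((nodup_bCells n m).filter _).append hnd' ?_
    intro x hx hx2
    have := hFnotz x hx2
    rw [List.mem_filter] at hx
    rw [hx.2] at this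
    cases this
  have hsub : ((bCells n m).filter (fun c => aGet2 (Vj mp n m s vis1 (j + 1)) c.1 c.2 == 0) ++ F')
      ⊆ (bCells n m).filter (fun c => aGet2 (Vj mp n m s vis1 j) c.1 c.2 == 0) := by
    intro x hx
    rw [List.mem_append] at hx
    rw [List.mem_filter]
    rcases hx with hx | hx
    · rw [List.mem_filter] at hx
      obtain ⟨hxc, hxz⟩ := hx
      have hr := (mem_bCells n m x).mp hxc
      have hxF : x ∉ F' := by
        intro hc
        have := hFnotz x hc
        rw [hxz] at this
        cases this
      refine ⟨hxc, ?_⟩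
      have := hvis' x.1 x.2 hr.1 hr.2.1 hr.2.2.1 hr.2.2.2
      rw [if_neg (by simpa using hxF)] at this
      rw [← this]
      exact hxz
    · refine ⟨hcellrange x hx, ?_⟩
      rw [(hok' x hx).2]
      rfl
  have hlen := (List.subperm_of_subset hA hsub).length_le
  rw [List.length_append] at hlen
  unfold Zc
  rw [List.countP_eq_length_filter, List.countP_eq_length_filter]
  exact hlen

theorem levels_empty_ge (mp : List (List Char)) (n m : Int) (s : Int × Int) (vis1 : List (List Int))
    (j : Nat) (h : Fj mp n m s vis1 j = []) :
    ∀ d, j ≤ d → Fj mp n m s vis1 d = [] := by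
  have hstep : ∀ k, Fj mp n m s vis1 (j + k) = [] := by
    intro k
    induction k with
    | zero => exact h
    | succ k ih =>
      show (levels mp n m [s] vis1 (j + k + 1)).1 = []
      simp only [levels]
      rw [show (levels mp n m [s] vis1 (j + k)).1 = [] from ih]
      rfl
  intro d hd
  have := hstep (d - j)
  rwa [show j + (d - j) = d by omega] at this

theorem lvlrun_shift (mp : List (List Char)) (n m : Int) :
    ∀ (f : Nat) (P : List (Int × Int)) (vis : List (List Int)),
      lvlrun mp n m f [] P vis = lvlrun mp n m f P [] vis := by
  intro f P vis
  cases f with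
  | zero => simp [lvlrun]
  | succ f => cases P with
    | nil => rfl
    | cons p P => simp [lvlrun]

-- the main simulation: lvlrun from level j returns the first goal level +1, or -1
theorem level_run (mp : List (List Char)) (n m : Int) (s : Int × Int) (vis1 : List (List Int))
    (hCall : ∀ j, Corr mp n m s vis1 j) (K' : Nat)
    (hKE : ∀ d, K' ≤ d → Fj mp n m s vis1 d = []) :
    ∀ (f : Nat), ∀ (j : Nat),
      (Fj mp n m s vis1 j).length + Zc mp n m (Vj mp n m s vis1 j) ≤ f →
      lvlrun mp n m f (Fj mp n m s vis1 j) [] (Vj mp n m s vis1 j) =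
        (match seekG (fun d => (Fj mp n m s vis1 d).any (fun c => aAt mp c.1 c.2 == 'G')) (K' + 1) j with
         | some d => (d : Int) + 1
         | none => -1) := by
  intro f
  induction f using Nat.strong_induction_on with
  | _ f ih =>
    intro j hfuel
    by_cases hFe : Fj mp n m s vis1 j = []
    · have hseek : seekG (fun d => (Fj mp n m s vis1 d).any (fun c => aAt mp c.1 c.2 == 'G')) (K' + 1) j = none := by
        apply seekG_none
        intro d hd
        rw [levels_empty_ge mp n m s vis1 j hFe d hd]
        rfl
      rw [hseek, hFe]
      cases f with
      | zero => simp [lvlrun]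
      | succ f => simp [lvlrun]
    · have hlen1 : 1 ≤ (Fj mp n m s vis1 j).length := by
        cases hF : Fj mp n m s vis1 j with
        | nil => exact absurd hF hFe
        | cons a b => simp [hF]
      by_cases hG : (Fj mp n m s vis1 j).any (fun c => aAt mp c.1 c.2 == 'G') = true
      · -- a goal cell sits in this frontier: A returns its visited value j+1
        have hfind : ∃ g, (Fj mp n m s vis1 j).find? (fun c => aAt mp c.1 c.2 == 'G') = some g := by
          cases hf : (Fj mp n m s vis1 j).find? (fun c => aAt mp c.1 c.2 == 'G') with
          | some g => exact ⟨g, rfl⟩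
          | none =>
            rw [List.find?_eq_none] at hf
            rw [List.any_eq_true] at hG
            obtain ⟨x, hx1, hx2⟩ := hG
            exact absurd hx2 (by simpa using hf x hx1)
        obtain ⟨g, hg⟩ := hfind
        rw [List.find?_eq_some_iff_append] at hg
        obtain ⟨hpg, F1, F2, hsplit, hF1⟩ := hg
        have hgG : aAt mp g.1 g.2 = 'G' := by simpa using hpg
        have hF1len : F1.length + 1 ≤ (Fj mp n m s vis1 j).length := by
          rw [hsplit]; simp
        have hf2 : f = (f - F1.length - 1) + 1 + F1.length := by omega
        have hnoG1 : ∀ c ∈ F1, aAt mp c.1 c.2 ≠ 'G' := by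
          intro c hc
          have := hF1 c hc
          simpa using this
        rw [hsplit, hf2, lvlrun_pass mp n m F1 (g :: F2) [] _ _ hnoG1]
        set st := F1.foldl (exp1 mp n m) ([], Vj mp n m s vis1 j) with hst
        have hgval : aGet2 st.2 g.1 g.2 = (j : Int) + 1 := by
          have hFval := corr_fval mp n m s vis1 j (hCall j)
          have hgF : g ∈ Fj mp n m s vis1 j := by rw [hsplit]; simp
          obtain ⟨hgok, hgv⟩ := hFval g hgF
          have hE0 : EInv mp n m (Vj mp n m s vis1 j) ((j : Int) + 1) ([], Vj mp n m s vis1 j) := by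
            refine ⟨(hCall j).1, ?_, ?_, List.nodup_nil⟩
            · intro i k _ _ _ _; simp
            · intro v hv; exact absurd hv List.not_mem_nil
          obtain ⟨⟨_, hvis', hok', _⟩, _⟩ := lfold_char mp n m (Vj mp n m s vis1 j) ((j : Int) + 1)
            (by omega) (by omega) F1 ([], Vj mp n m s vis1 j) hE0
            (fun u hu => hFval u (by rw [hsplit]; simp [hu]))
          have hgnotacc : g ∉ st.1 := by
            intro hc
            have := (hok' g hc).2
            rw [hgv] at this
            omega
          rw [hvis' g.1 g.2 hgok.1 hgok.2.1 hgok.2.2.1 hgok.2.2.2.1,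
            if_neg (by simpa using hgnotacc), hgv]
        have hrun : lvlrun mp n m ((f - F1.length - 1) + 1) (g :: F2) st.1 st.2 = aGet2 st.2 g.1 g.2 := by
          simp only [lvlrun, if_pos hgG]
        rw [hrun, hgval]
        have hseek : seekG (fun d => (Fj mp n m s vis1 d).any (fun c => aAt mp c.1 c.2 == 'G')) (K' + 1) j = some j := by
          simp only [seekG, if_pos hG]
        rw [hseek]
      · -- no goal in this frontier: pass the whole level and recurse
        have hnoG : ∀ c ∈ Fj mp n m s vis1 j, aAt mp c.1 c.2 ≠ 'G' := by
          intro c hc heq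
          exact hG (List.any_eq_true.mpr ⟨c, hc, by simp [heq]⟩)
        have hf2 : f = (f - (Fj mp n m s vis1 j).length) + (Fj mp n m s vis1 j).length := by omega
        have hpass := lvlrun_pass mp n m (Fj mp n m s vis1 j) [] [] (Vj mp n m s vis1 j)
          (f - (Fj mp n m s vis1 j).length) hnoG
        rw [List.append_nil] at hpass
        rw [hf2, hpass]
        have hnext1 : ((Fj mp n m s vis1 j).foldl (exp1 mp n m) ([], Vj mp n m s vis1 j)).1
            = Fj mp n m s vis1 (j + 1) := rfl
        have hnext2 : ((Fj mp n m s vis1 j).foldl (exp1 mp n m) ([], Vj mp n m s vis1 j)).2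
            = Vj mp n m s vis1 (j + 1) := rfl
        rw [hnext1, hnext2, lvlrun_shift]
        have hZ := zc_bound mp n m s vis1 j (hCall j)
        have hlt : f - (Fj mp n m s vis1 j).length < f := by omega
        have hfuel' : (Fj mp n m s vis1 (j + 1)).length + Zc mp n m (Vj mp n m s vis1 (j + 1))
            ≤ f - (Fj mp n m s vis1 j).length := by omega
        rw [ih (f - (Fj mp n m s vis1 j).length) hlt (j + 1) hfuel']
        have hfar : (Fj mp n m s vis1 (j + 1 + K')).any (fun c => aAt mp c.1 c.2 == 'G') = false := by
          rw [hKE (j + 1 + K') (by omega)]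
          rfl
        have hstepseek : seekG (fun d => (Fj mp n m s vis1 d).any (fun c => aAt mp c.1 c.2 == 'G')) (K' + 1) j
            = seekG (fun d => (Fj mp n m s vis1 d).any (fun c => aAt mp c.1 c.2 == 'G')) (K' + 1) (j + 1) := by
          have h1 : seekG (fun d => (Fj mp n m s vis1 d).any (fun c => aAt mp c.1 c.2 == 'G')) (K' + 1) j
              = seekG (fun d => (Fj mp n m s vis1 d).any (fun c => aAt mp c.1 c.2 == 'G')) K' (j + 1) := by
            simp only [seekG]
            rw [if_neg hG]
          rw [h1]
          exact (seekG_succ_of_far _ K' (j + 1) hfar).symm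
        rw [hstepseek]

theorem seekG_none_forall (pred : Nat → Bool) :
    ∀ (f j : Nat), seekG pred f j = none → ∀ e, j ≤ e → e < j + f → pred e = false := by
  intro f
  induction f with
  | zero => intro j _ e he1 he2; omega
  | succ f ih =>
    intro j h e he1 he2
    simp only [seekG] at h
    by_cases hp : pred j
    · rw [if_pos hp] at h; cases h
    · rw [if_neg hp] at h
      by_cases hej : e = j
      · subst hej; simpa using hp
      · exact ih (j + 1) h e (by omega) (by omega)

theorem distIter_shift (mp : List (List Char)) (n m : Int) :
    ∀ (k : Nat) (d0 : PySem.Dict (Int × Int) Int),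
      distIter mp n m (bRound mp n m d0) k = distIter mp n m d0 (k + 1) := by
  intro k
  induction k with
  | zero => intro d0; rfl
  | succ k ih =>
    intro d0
    show bRound mp n m (distIter mp n m (bRound mp n m d0) k) = _
    rw [ih d0]
    rfl

theorem foldl_bRound (mp : List (List Char)) (n m : Int) :
    ∀ (l : List Int) (d0 : PySem.Dict (Int × Int) Int),
      l.foldl (fun d _ => bRound mp n m d) d0 = distIter mp n m d0 l.length := by
  intro l
  induction l with
  | nil => intro d0; rfl
  | cons a l ih =>
    intro d0
    simp only [List.foldl_cons, List.length_cons]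
    rw [ih (bRound mp n m d0), distIter_shift]

theorem length_bCells (n m : Int) : (bCells n m).length = n.toNat * m.toNat := by
  unfold bCells
  rw [List.length_flatMap]
  have hmap : ∀ i : Int, ((PySem.List.pyRange 0 m 1).map (fun j => (i, j))).length = m.toNat := by
    intro i
    rw [List.length_map, PySem.List.length_pyRange_one]
    omega
  rw [List.map_congr_left (fun i _ => hmap i)]
  rw [List.map_const', List.sum_replicate, smul_eq_mul, PySem.List.length_pyRange_one]
  norm_num

theorem pvFrontierEmpty (mp : List (List Char)) (n m : Int) (s : Int × Int) (vis1 : List (List Int))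
    (hCall : ∀ j, Corr mp n m s vis1 j) (hs : CellOK mp n m s) :
    ∀ d, n.toNat * m.toNat ≤ d → Fj mp n m s vis1 d = [] := by
  set K := n.toNat * m.toNat with hK
  -- vis1 marks s, so at most K - 1 cells are unvisited at level 0
  have hsmem : s ∈ bCells n m := (mem_bCells n m s).mpr ⟨hs.1, hs.2.1, hs.2.2.1, hs.2.2.2.1⟩
  have hsval : aGet2 (Vj mp n m s vis1 0) s.1 s.2 = 1 := by
    have := (corr_fval mp n m s vis1 0 (hCall 0) s (by simp [Fj, levels])).2
    simpa using this
  have hKpos : 1 ≤ K := by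
    have := List.length_pos_iff.mpr (List.ne_nil_of_mem hsmem)
    rw [length_bCells n m] at this
    omega
  have hZ0 : Zc mp n m (Vj mp n m s vis1 0) + 1 ≤ K := by
    have hA : ((bCells n m).filter (fun c => aGet2 (Vj mp n m s vis1 0) c.1 c.2 == 0) ++ [s]).Nodup := by
      refine ((nodup_bCells n m).filter _).append (List.nodup_singleton s) ?_
      intro x hx hx2
      simp only [List.mem_singleton] at hx2
      subst hx2
      rw [List.mem_filter] at hx
      have := hx.2
      rw [hsval] at this
      simp at this
    have hsub : ((bCells n m).filter (fun c => aGet2 (Vj mp n m s vis1 0) c.1 c.2 == 0) ++ [s])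
        ⊆ bCells n m := by
      intro x hx
      rw [List.mem_append] at hx
      rcases hx with hx | hx
      · exact (List.mem_filter.mp hx).1
      · simp only [List.mem_singleton] at hx
        subst hx
        exact hsmem
    have := (List.subperm_of_subset hA hsub).length_le
    rw [List.length_append, List.length_singleton, length_bCells n m] at this
    unfold Zc
    rw [List.countP_eq_length_filter]
    omega
  -- if the frontier never emptied by level K the unvisited count would go negative
  have hKempty : Fj mp n m s vis1 K = [] := by
    by_contra hne
    have hnonempty : ∀ t, t ≤ K → Fj mp n m s vis1 t ≠ [] := by
      intro t ht hemp
      exact hne (levels_empty_ge mp n m s vis1 t hemp K ht)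
    have hdecr : ∀ t, t ≤ K → Zc mp n m (Vj mp n m s vis1 t) + t ≤ Zc mp n m (Vj mp n m s vis1 0) := by
      intro t
      induction t with
      | zero => intro _; omega
      | succ t iht =>
        intro ht
        have h1 := zc_bound mp n m s vis1 t (hCall t)
        have h2 : 1 ≤ (Fj mp n m s vis1 (t + 1)).length := by
          cases hF : Fj mp n m s vis1 (t + 1) with
          | nil => exact absurd hF (hnonempty (t + 1) ht)
          | cons a b => simp [hF]
        have h3 := iht (by omega)
        omega
    have := hdecr K (le_refl K)
    omega
  exact fun d hd => levels_empty_ge mp n m s vis1 K hKempty d hd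

-- B's final minimum over goal cells equals the first goal level
theorem bmin_eq (mp : List (List Char)) (n m : Int) (s : Int × Int) (vis1 : List (List Int))
    (hCall : ∀ j, Corr mp n m s vis1 j) (K : Nat)
    (hKE : ∀ d, K ≤ d → Fj mp n m s vis1 d = []) :
    (PySem.List.min? (((Dj mp n m s K).items.filter
        (fun p => aAt mp p.1.1 p.1.2 = 'G')).map (fun p => p.2)) (fun x => x)).getD (-1)
      = (match seekG (fun d => (Fj mp n m s vis1 d).any (fun c => aAt mp c.1 c.2 == 'G')) (K + 1) 0 with
         | some d => (d : Int)
         | none => -1) := by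
  obtain ⟨hsh, hnd, hb, ha, hcs, _, _, _⟩ := hCall K
  have hvalchar : ∀ p ∈ (Dj mp n m s K).items, aAt mp p.1.1 p.1.2 = 'G' →
      ∃ e : Nat, e ≤ K ∧ p.2 = (e : Int) ∧
        (Fj mp n m s vis1 e).any (fun c => aAt mp c.1 c.2 == 'G') = true := by
    intro p hp hG
    have hgp : (Dj mp n m s K).get? p.1 = some p.2 := PySem.Dict.get?_of_mem_items _ hp hnd
    have hbp := hb p.1 p.2 hgp
    refine ⟨p.2.toNat, by omega, by omega, ?_⟩
    have hFe : p.1 ∈ Fj mp n m s vis1 p.2.toNat := by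
      refine (hcs p.2.toNat (by omega) p.1).mp ?_
      rw [show ((p.2.toNat : Nat) : Int) = p.2 by omega]
      exact hgp
    rw [List.any_eq_true]
    exact ⟨p.1, hFe, by simp [hG]⟩
  cases hseek : seekG (fun d => (Fj mp n m s vis1 d).any (fun c => aAt mp c.1 c.2 == 'G')) (K + 1) 0 with
  | none =>
    have hforall := seekG_none_forall _ _ _ hseek
    have hfil : (Dj mp n m s K).items.filter (fun p => aAt mp p.1.1 p.1.2 = 'G') = [] := by
      rw [List.filter_eq_nil_iff]
      intro p hp hpG
      obtain ⟨e, he, _, hany⟩ := hvalchar p hp (by simpa using hpG)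
      have := hforall e (by omega) (by omega)
      rw [hany] at this
      cases this
    rw [hfil]
    rfl
  | some d0 =>
    obtain ⟨_, hd0lt, hd0p, hd0min⟩ := seekG_some _ _ _ _ hseek
    rw [List.any_eq_true] at hd0p
    obtain ⟨g', hg'F, hg'G⟩ := hd0p
    have hg'G' : aAt mp g'.1 g'.2 = 'G' := by simpa using hg'G
    have hgget : (Dj mp n m s K).get? g' = some (d0 : Int) := (hcs d0 (by omega) g').mpr hg'F
    have hgitems : (g', (d0 : Int)) ∈ (Dj mp n m s K).items :=
      PySem.Dict.mem_items_of_get?_eq_some _ hgget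
    have hd0mem : (d0 : Int) ∈ ((Dj mp n m s K).items.filter
        (fun p => aAt mp p.1.1 p.1.2 = 'G')).map (fun p => p.2) := by
      rw [List.mem_map]
      exact ⟨(g', (d0 : Int)), List.mem_filter.mpr ⟨hgitems, by simpa using hg'G'⟩, rfl⟩
    have hlb : ∀ x ∈ ((Dj mp n m s K).items.filter
        (fun p => aAt mp p.1.1 p.1.2 = 'G')).map (fun p => p.2), (d0 : Int) ≤ x := by
      intro x hx
      rw [List.mem_map] at hx
      obtain ⟨p, hpf, rfl⟩ := hx
      rw [List.mem_filter] at hpf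
      obtain ⟨e, heK, hpe, hany⟩ := hvalchar p hpf.1 (by simpa using hpf.2)
      by_cases hed : e < d0
      · have := hd0min e (by omega) hed
        rw [hany] at this
        cases this
      · rw [hpe]
        omega
    cases hmv : PySem.List.min? (((Dj mp n m s K).items.filter
        (fun p => aAt mp p.1.1 p.1.2 = 'G')).map (fun p => p.2)) (fun x => x) with
    | none =>
      rw [PySem.List.min?_eq_none_iff] at hmv
      rw [hmv] at hd0mem
      exact absurd hd0mem List.not_mem_nil
    | some mv =>
      have h1 : (d0 : Int) ≤ mv := hlb mv (PySem.List.min?_mem hmv)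
      have h2 : mv ≤ (d0 : Int) := PySem.List.min?_isMin hmv _ hd0mem
      have : mv = (d0 : Int) := le_antisymm h2 h1
      subst this
      rfl

theorem scanRow_prefix (mp : List (List Char)) (i : Int) :
    ∀ (js R G : List Int), ∃ t, (aScanRow mp i js R G).1 = R ++ t := by
  intro js
  induction js with
  | nil => intro R G; exact ⟨[], by simp [aScanRow]⟩
  | cons j js ih =>
    intro R G
    by_cases h1 : aAt mp i j = 'R'
    · by_cases h2 : G = []
      · subst h2
        obtain ⟨t, ht⟩ := ih (R ++ [i, j]) []
        refine ⟨[i, j] ++ t, ?_⟩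
        simp only [aScanRow, if_pos h1]
        rw [if_neg (by simp)]
        rw [ht]; simp
      · exact ⟨[i, j], by simp [aScanRow, h1, h2]⟩
    · by_cases h3 : aAt mp i j = 'G'
      · by_cases h2 : R = []
        · subst h2
          obtain ⟨t, ht⟩ := ih [] (G ++ [i, j])
          refine ⟨t, ?_⟩
          simp only [aScanRow, if_neg h1, if_pos h3]
          rw [if_neg (by simp)]
          simpa using ht
        · exact ⟨[], by simp [aScanRow, h3, h2]⟩
      · by_cases h2 : R ≠ [] ∧ G ≠ []
        · exact ⟨[], by simp [aScanRow, h1, h3, h2.1, h2.2]⟩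
        · obtain ⟨t, ht⟩ := ih R G
          exact ⟨t, by simp only [aScanRow, if_neg h1, if_neg h3, if_neg h2]; exact ht⟩

theorem scan_prefix (mp : List (List Char)) :
    ∀ (is R G : List Int), ∃ t, (aScan mp is R G).1 = R ++ t := by
  intro is
  induction is with
  | nil => intro R G; exact ⟨[], by simp [aScan]⟩
  | cons i is ih =>
    intro R G
    obtain ⟨u, hu⟩ := scanRow_prefix mp i
      (PySem.List.pyRange 0 ((PySem.List.pyGetD mp 0 []).length : Int) 1) R G
    by_cases hf : (aScanRow mp i (PySem.List.pyRange 0 ((PySem.List.pyGetD mp 0 []).length : Int) 1) R G).2.2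
    · exact ⟨u, by simp only [aScan, if_pos hf]; exact hu⟩
    · obtain ⟨t, ht⟩ := ih (aScanRow mp i (PySem.List.pyRange 0 ((PySem.List.pyGetD mp 0 []).length : Int) 1) R G).1
        (aScanRow mp i (PySem.List.pyRange 0 ((PySem.List.pyGetD mp 0 []).length : Int) 1) R G).2.1
      refine ⟨u ++ t, ?_⟩
      simp only [aScan, if_neg hf]
      rw [ht, hu, List.append_assoc]

theorem scanRow_first (mp : List (List Char)) (i : Int) :
    ∀ (js G : List Int),
      (match js.find? (fun j => aAt mp i j = 'R') with
       | some j => ∃ t, (aScanRow mp i js [] G).1 = i :: j :: t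
       | none => ∃ G', aScanRow mp i js [] G = ([], G', false)) := by
  intro js
  induction js with
  | nil => intro G; exact ⟨G, rfl⟩
  | cons j js ih =>
    intro G
    by_cases h1 : aAt mp i j = 'R'
    · rw [List.find?_cons_of_pos (by simpa using h1)]
      by_cases h2 : G = []
      · subst h2
        obtain ⟨t, ht⟩ := scanRow_prefix mp i js [i, j] []
        refine ⟨t, ?_⟩
        simp only [aScanRow, if_pos h1]
        rw [if_neg (by simp)]
        simpa using ht
      · exact ⟨[], by simp [aScanRow, h1, h2]⟩
    · rw [List.find?_cons_of_neg (by simpa using h1)]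
      by_cases h3 : aAt mp i j = 'G'
      · have hrec := ih (G ++ [i, j])
        revert hrec
        cases js.find? (fun j => aAt mp i j = 'R') with
        | some j' =>
          intro hrec
          obtain ⟨t, ht⟩ := hrec
          exact ⟨t, by simp only [aScanRow, if_neg h1, if_pos h3]; simpa using ht⟩
        | none =>
          intro hrec
          obtain ⟨G', hG'⟩ := hrec
          exact ⟨G', by simp only [aScanRow, if_neg h1, if_pos h3]; simpa using hG'⟩
      · have hrec := ih G
        revert hrec
        cases js.find? (fun j => aAt mp i j = 'R') with
        | some j' =>
          intro hrec
          obtain ⟨t, ht⟩ := hrec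
          exact ⟨t, by simp only [aScanRow, if_neg h1, if_neg h3]; simpa using ht⟩
        | none =>
          intro hrec
          obtain ⟨G', hG'⟩ := hrec
          exact ⟨G', by simp only [aScanRow, if_neg h1, if_neg h3]; simpa using hG'⟩

theorem scan_first (mp : List (List Char)) :
    ∀ (is G : List Int),
      (match (is.flatMap (fun i =>
          (PySem.List.pyRange 0 ((PySem.List.pyGetD mp 0 []).length : Int) 1).map
            (fun j => (i, j)))).find? (fun c => aAt mp c.1 c.2 = 'R') with
       | some c => ∃ t, (aScan mp is [] G).1 = c.1 :: c.2 :: t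
       | none => (aScan mp is [] G).1 = []) := by
  intro is
  induction is with
  | nil => intro G; simp [aScan]
  | cons i is ih =>
    intro G
    rw [List.flatMap_cons, List.find?_append, List.find?_map]
    have hrow := scanRow_first mp i
      (PySem.List.pyRange 0 ((PySem.List.pyGetD mp 0 []).length : Int) 1) G
    revert hrow
    cases hfr : (PySem.List.pyRange 0 ((PySem.List.pyGetD mp 0 []).length : Int) 1).find?
        (fun j => aAt mp i j = 'R') with
    | some j =>
      intro hrow
      obtain ⟨t, ht⟩ := hrow
      have hco : ((PySem.List.pyRange 0 ((PySem.List.pyGetD mp 0 []).length : Int) 1).find?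
          ((fun c : Int × Int => decide (aAt mp c.1 c.2 = 'R')) ∘ (fun j => (i, j)))) = some j := by
        simpa using hfr
      rw [hco]
      simp only [Option.map_some, Option.some_or]
      by_cases hf : (aScanRow mp i (PySem.List.pyRange 0 ((PySem.List.pyGetD mp 0 []).length : Int) 1) [] G).2.2
      · exact ⟨t, by simp only [aScan, if_pos hf]; exact ht⟩
      · obtain ⟨u, hu⟩ := scan_prefix mp is
          (aScanRow mp i (PySem.List.pyRange 0 ((PySem.List.pyGetD mp 0 []).length : Int) 1) [] G).1
          (aScanRow mp i (PySem.List.pyRange 0 ((PySem.List.pyGetD mp 0 []).length : Int) 1) [] G).2.1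
        refine ⟨t ++ u, ?_⟩
        simp only [aScan, if_neg hf]
        rw [hu, ht]
        simp
    | none =>
      intro hrow
      obtain ⟨G', hG'⟩ := hrow
      have hco : ((PySem.List.pyRange 0 ((PySem.List.pyGetD mp 0 []).length : Int) 1).find?
          ((fun c : Int × Int => decide (aAt mp c.1 c.2 = 'R')) ∘ (fun j => (i, j)))) = none := by
        simpa using hfr
      rw [hco]
      simp only [Option.map_none, Option.none_or]
      have hstep : aScan mp (i :: is) [] G = aScan mp is [] G' := by
        simp [aScan, hG']
      rw [hstep]
      exact ih G'

-- ===== VERDICT (by name: the statement is the Claim_ definition above) =====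
theorem solution_spec : Claim_equal_solution := by
  unfold Claim_equal_solution
  intro board _ hPre
  obtain ⟨hne, hrows, hany⟩ := hPre
  unfold Spec_solution solution solution_alt
  cases board with
  | nil => exact absurd rfl hne
  | cons b0 brest =>
  simp only []
  set mp := (b0 :: brest).map (fun b => b.toList) with hmp
  set n : Int := (mp.length : Int) with hn
  set m : Int := ((PySem.List.pyGetD mp 0 []).length : Int) with hm
  have hn0 : 0 ≤ n := by positivity
  have hm0 : 0 ≤ m := by positivity
  have hhead : PySem.List.pyGetD mp 0 [] = b0.toList := by
    rw [hmp]; simp [PySem.List.pyGetD_zero_cons]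
  have hm0len : m = (b0.toList.length : Int) := by rw [hm, hhead]
  -- the first 'R' cell exists
  have hex : ∃ c ∈ bCells n m, aAt mp c.1 c.2 = 'R' := by
    simp only [List.any_eq_true] at hany
    obtain ⟨r, hr, hcont⟩ := hany
    obtain ⟨ri, hri, hre⟩ := List.mem_iff_getElem.mp hr
    have hcont' : 'R' ∈ r.toList.take b0.toList.length := by
      simpa using hcont
    obtain ⟨j, hjlt, hje⟩ := List.getElem_of_mem hcont'
    have hjb : j < b0.toList.length ∧ j < r.toList.length := by
      rw [List.length_take] at hjlt; omega
    have hje' : r.toList[j]'hjb.2 = 'R' := by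
      simpa using (List.getElem_take ▸ hje)
    have hrowi : PySem.List.pyGetD mp (ri : Int) [] = r.toList := by
      rw [PySem.List.pyGetD_natCast, hmp, List.getD_eq_getElem _ _ (by simpa using hri)]
      simp only [List.getElem_map]
      rw [hre]
    refine ⟨((ri : Int), (j : Int)), ?_, ?_⟩
    · rw [mem_bCells]
      refine ⟨by positivity, ?_, by positivity, ?_⟩
      · show (ri : Int) < n
        rw [hn, hmp]
        simp only [List.length_map]
        exact_mod_cast hri
      · show (j : Int) < m
        rw [hm0len]
        exact_mod_cast hjb.1
    · show aAt mp (ri : Int) (j : Int) = 'R'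
      unfold aAt
      rw [hrowi, PySem.List.pyGetD_natCast, List.getD_eq_getElem _ _ hjb.2]
      exact hje'
  have hfs : ((bCells n m).find? (fun c => aAt mp c.1 c.2 = 'R')).isSome := by
    rw [List.find?_isSome]
    obtain ⟨c, hc1, hc2⟩ := hex
    exact ⟨c, hc1, by simpa using hc2⟩
  obtain ⟨s0, hfind⟩ := Option.isSome_iff_exists.mp hfs
  have hs0mem : s0 ∈ bCells n m := List.mem_of_find?_eq_some hfind
  have hs0R : aAt mp s0.1 s0.2 = 'R' := by
    have := List.find?_some hfind
    simpa using this
  have hs0b := (mem_bCells n m s0).mp hs0mem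
  have hs0ok : CellOK mp n m s0 :=
    ⟨hs0b.1, hs0b.2.1, hs0b.2.2.1, hs0b.2.2.2, by rw [hs0R]; decide⟩
  -- A's scan finds s0 first
  have hscan := scan_first mp (PySem.List.pyRange 0 n 1) []
  rw [show ((PySem.List.pyRange 0 n 1).flatMap (fun i =>
      (PySem.List.pyRange 0 ((PySem.List.pyGetD mp 0 []).length : Int) 1).map (fun j => (i, j))))
      = bCells n m from rfl] at hscan
  rw [hfind] at hscan
  obtain ⟨t, ht⟩ := hscan
  have hx : PySem.List.pyGetD (aScan mp (PySem.List.pyRange 0 n 1) [] []).1 0 0 = s0.1 := by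
    rw [ht]; exact PySem.List.pyGetD_zero_cons _ _ _
  have hy : PySem.List.pyGetD (aScan mp (PySem.List.pyRange 0 n 1) [] []).1 1 0 = s0.2 := by
    rw [ht, PySem.List.pyGetD_eq_getElem _ 0 (by omega) (by simp)]
    norm_num
  rw [hx, hy]
  -- B's start is s0
  have hstart : ((bCells n m).find? (fun c => bAt mp c.1 c.2 = 'R')).getD (0, 0) = s0 := by
    rw [bAt_eq_aAt, hfind]
    rfl
  rw [hstart]
  -- set up the level correspondence
  set vis0 := (PySem.List.pyRange 0 n 1).map (fun _ => List.replicate m.toNat (0 : Int)) with hvis0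
  set vis1 := aSet2 vis0 s0.1 s0.2 1 with hvis1
  set K := n.toNat * m.toNat with hK
  have hCall : ∀ j, Corr mp n m s0 vis1 j :=
    corr_all mp n m s0 hs0ok vis1 (by rw [hvis1, hvis0])
  have hKE : ∀ d, K ≤ d → Fj mp n m s0 vis1 d = [] :=
    pvFrontierEmpty mp n m s0 vis1 hCall hs0ok
  -- A side: queue BFS = lvlrun = first goal level
  have hA1 : ([s0.1, s0.2] : List Int) = flatQ [s0] ++ flatQ ([] : List (Int × Int)) := by
    simp [flatQ]
  rw [hA1, abfs_eq_lvlrun]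
  have hfuel : (Fj mp n m s0 vis1 0).length + Zc mp n m (Vj mp n m s0 vis1 0) ≤ K + 2 := by
    have h1 : (Fj mp n m s0 vis1 0).length = 1 := rfl
    have h2 : Zc mp n m (Vj mp n m s0 vis1 0) ≤ K := by
      unfold Zc
      calc (bCells n m).countP _ ≤ (bCells n m).length := List.countP_le_length
        _ = K := length_bCells n m
    omega
  rw [show lvlrun mp n m (K + 2) [s0] [] vis1
      = lvlrun mp n m (K + 2) (Fj mp n m s0 vis1 0) [] (Vj mp n m s0 vis1 0) from rfl]
  rw [level_run mp n m s0 vis1 hCall K hKE (K + 2) 0 hfuel]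
  -- B side: the relaxation rounds are distIter, and the min over goal cells is the same level
  have hlen : (PySem.List.pyRange 0 (n * m) 1).length = K := by
    rw [PySem.List.length_pyRange_one, hK]
    rw [show n * m - 0 = n * m by ring]
    exact Int.toNat_mul hn0 hm0
  rw [foldl_bRound mp n m _ ((PySem.Dict.empty).insert s0 0), hlen]
  rw [show distIter mp n m ((PySem.Dict.empty).insert s0 0) K = Dj mp n m s0 K from rfl]
  rw [bAt_eq_aAt]
  rw [bmin_eq mp n m s0 vis1 hCall K hKE]
  -- both sides are now expressed through the same seekG value
  cases hseek : seekG (fun d => (Fj mp n m s0 vis1 d).any (fun c => aAt mp c.1 c.2 == 'G')) (K + 1) 0 with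
  | some d =>
    rw [if_pos (by have := Int.natCast_nonneg d; linarith)]
    ring
  | none =>
    rw [if_neg (by norm_num)]
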